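-- pv_equiv track=rewrite | github.com/co-re-study/co-re-study | 57/경사로의 개수/윤성운.py | solution
-- ===== SOURCE A (Python) =====
-- def solution(grid, d, k):
--
--     N = len(grid)
--     M = len(grid[0])
--     D = len(d)
--
--     dr = [-1, 1, 0, 0]
--     dc = [0, 0, -1, 1]
--
--     path_dict = dict()
--
--     for cr in range(N):
--         for cc in range(M):
--             visited = [[[0] * (D + 1) for _ in range(M)] for _ in range(N)]
--             visited[cr][cc][0] = 1
--
--             # 경사로를 따라가면서 방문 수 누적
--             for i in range(1, D + 1):
--                 for r in range(N):
--                     for c in range(M):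
--                         if not visited[r][c][i - 1]:
--                             continue
--                         for j in range(4):
--                             nr = r + dr[j]
--                             nc = c + dc[j]
--                             if 0 <= nr < N and 0 <= nc < M and  grid[nr][nc] - grid[r][c] == d[i - 1]:
--                                 visited[nr][nc][i] = (visited[nr][nc][i] + visited[r][c][i - 1]) % 1000000007
--
--             # 누적된 방문 수 저장
--             path_dict[(cr, cc)] = dict()
--             for r in range(N):
--                 for c in range(M):
--                     if visited[r][c][-1]:
--                         path_dict[(cr, cc)][(r, c)] = visited[r][c][-1]
--
--     # 2^power만큼 사이클을 돌았을 때 도달하는 좌표 정보와 방문 수 저장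
--     dp = [dict() for _ in range(31)]
--     for position in path_dict:
--         dp[0][position] = dict()
--         for dest in path_dict[position]:
--             dp[0][position][dest] = path_dict[position][dest]
--
--     for power in range(1, 31):
--         for current in dp[power - 1]:
--             dp[power][current] = dict()
--             for mid in dp[power - 1][current]:
--                 if mid in dp[power - 1]:
--                     for dest in dp[power - 1][mid]:
--                         if dest in dp[power][current]:
--                             dp[power][current][dest] = (dp[power][current][dest] + dp[power - 1][current][mid] * dp[power - 1][mid][dest]) % 1000000007
--                         else:
--                             dp[power][current][dest] = (dp[power - 1][current][mid] * dp[power - 1][mid][dest]) % 1000000007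
--
--     # 가장 처음으로 사이클을 시작하는 좌표 저장
--     acc_dict = dict()
--     for position in path_dict:
--         if not path_dict[position]:
--             continue
--         acc_dict[position] = 1
--
--     # 2^power만큼 건너뛰면서 방문 가능한 수 누적
--     cycle = 0
--     power = 30
--     while cycle != k:
--         while cycle + (1 << power) > k:
--             power -= 1
--         cycle += 1 << power
--         new_acc_dict = dict()
--         for current in acc_dict:
--             for dest in dp[power][current]:
--                 if dest in new_acc_dict:
--                     new_acc_dict[dest] = (new_acc_dict[dest] + (acc_dict[current] * dp[power][current][dest])) % 1000000007
--                 else: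
--                     new_acc_dict[dest] = (acc_dict[current] * dp[power][current][dest]) % 1000000007
--         acc_dict = new_acc_dict
--
--     # 가장 마지막에 도달한 값들 더해서 출력
--     answer = 0
--     for position in acc_dict:
--         answer = (answer + acc_dict[position]) % 1000000007
--
--     return answer
-- ===== SOURCE B (Python) =====
-- def solution(grid, d, k):
--     MOD = 1000000007
--     N, M = len(grid), len(grid[0])
--     cells = [(r, c) for r in range(N) for c in range(M)]
--
--     # adjacency matrix of one slope step with height difference h
--     def step_matrix(h):
--         mat = {}
--         for (r, c) in cells:
--             row = {}
--             for (nr, nc) in ((r - 1, c), (r + 1, c), (r, c - 1), (r, c + 1)):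
--                 if 0 <= nr < N and 0 <= nc < M and grid[nr][nc] - grid[r][c] == h:
--                     row[(nr, nc)] = 1
--             mat[(r, c)] = row
--         return mat
--
--     # sparse matrix product, mod MOD
--     def mat_mul(X, Y):
--         out = {}
--         for u, xrow in X.items():
--             orow = {}
--             for m, a in xrow.items():
--                 for v, b in Y.get(m, {}).items():
--                     orow[v] = (orow.get(v, 0) + a * b) % MOD
--             out[u] = orow
--         return out
--
--     # one-cycle transition = product of the D per-step adjacency matrices
--     T = {u: {u: 1} for u in cells}
--     for h in d:
--         T = mat_mul(T, step_matrix(h))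
--
--     # starting positions: those with at least one full-cycle path
--     starts = {u: 1 for u, row in T.items() if any(row.values())}
--
--     if k == 0:
--         return len(starts) % MOD
--
--     # T^k by top-down recursive squaring
--     def mat_pow(X, e):
--         if e == 1:
--             return X
--         H = mat_pow(X, e // 2)
--         S = mat_mul(H, H)
--         return mat_mul(S, X) if e % 2 else S
--
--     P = mat_pow(T, k)
--
--     # row vector of starts times P
--     vec = {}
--     for u, a in starts.items():
--         for v, b in P.get(u, {}).items():
--             vec[v] = (vec.get(v, 0) + a * b) % MOD
--     return sum(vec.values()) % MOD
-- ===== Notes on version B (the rewrite author's own statement) =====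
-- stated objective: faster
-- what changed: A's N*M independent per-start BFS runs over a dense 3D visited array are replaced by building the one-cycle transition as a product of D sparse per-step adjacency matrices (at most 4 entries per row) starting from the identity, and A's unconditional 31-entry doubling table plus greedy top-down bit walk is replaced by a recursive top-down mat_pow (square, times the base on odd exponents) applied once, then one vector-matrix product.
-- outside the precondition, e.g. on solution([[0, 0], [0]], [], 0): A returns 4, B returns 4
import Mathlib
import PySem

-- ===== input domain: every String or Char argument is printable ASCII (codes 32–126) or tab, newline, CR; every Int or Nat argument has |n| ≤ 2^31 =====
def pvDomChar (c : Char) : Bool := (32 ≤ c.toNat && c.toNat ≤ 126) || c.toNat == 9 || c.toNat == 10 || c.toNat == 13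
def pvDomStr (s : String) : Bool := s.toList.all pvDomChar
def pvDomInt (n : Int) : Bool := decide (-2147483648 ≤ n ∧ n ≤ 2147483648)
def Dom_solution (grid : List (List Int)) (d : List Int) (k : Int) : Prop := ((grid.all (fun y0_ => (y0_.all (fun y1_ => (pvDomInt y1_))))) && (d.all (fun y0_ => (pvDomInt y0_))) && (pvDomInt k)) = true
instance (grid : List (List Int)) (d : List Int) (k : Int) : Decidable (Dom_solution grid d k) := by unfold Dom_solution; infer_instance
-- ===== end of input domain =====

-- B replaces A's N*M per-start dense BFS tables by a product of D sparse per-step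
-- adjacency matrices (from the identity), and A's 31 unconditional squarings +
-- greedy bit walk by one recursive top-down mat_pow (objective: faster; the timing
-- run measured B ≥ 1.5x faster at the largest size).

-- ===== PORT A =====

def pvP : Int := 1000000007

abbrev PvCell := Int × Int
abbrev PvVec := PySem.Dict PvCell Int
abbrev PvMat := PySem.Dict PvCell PvVec

-- 3-dimensional list-of-lists access, as Python's visited[r][c][i] (indices in range)
def pvGet3 (v : List (List (List Int))) (r c i : Nat) : Int := ((v.getD r []).getD c []).getD i 0

def pvSet3 (v : List (List (List Int))) (r c i : Nat) (x : Int) : List (List (List Int)) :=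
  v.set r ((v.getD r []).set c (((v.getD r []).getD c []).set i x))

-- A's phase 1: the per-start BFS table visited[r][c][i]
def pvBuildVisited (grid : List (List Int)) (d : List Int) (N M : Nat) (cr cc : Nat) :
    List (List (List Int)) :=
  let D := d.length
  let init := pvSet3 (List.replicate N (List.replicate M (List.replicate (D + 1) (0 : Int)))) cr cc 0 1
  (List.range D).foldl (fun vis i =>
    (List.range N).foldl (fun vis r =>
      (List.range M).foldl (fun vis c =>
        if pvGet3 vis r c i = 0 then vis else
        (List.range 4).foldl (fun vis j =>
          let nr : Int := (r : Int) + ([-1, 1, 0, 0].getD j 0)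
          let nc : Int := (c : Int) + ([0, 0, -1, 1].getD j 0)
          if 0 ≤ nr ∧ nr < (N : Int) ∧ 0 ≤ nc ∧ nc < (M : Int) ∧
              (grid.getD nr.toNat []).getD nc.toNat 0 - (grid.getD r []).getD c 0 = d.getD i 0 then
            pvSet3 vis nr.toNat nc.toNat (i + 1)
              (PySem.Int.mod (pvGet3 vis nr.toNat nc.toNat (i + 1) + pvGet3 vis r c i) pvP)
          else vis) vis) vis) vis) init

-- the row path_dict[(cr,cc)] collected from visited[..][..][-1]
def pvPathRow (vis : List (List (List Int))) (N M D : Nat) : PvVec :=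
  (List.range N).foldl (fun row (r : Nat) =>
    (List.range M).foldl (fun row (c : Nat) =>
      if pvGet3 vis r c D = 0 then row
      else row.insert ((r : Int), (c : Int)) (pvGet3 vis r c D)) row) PySem.Dict.empty

def pvBuildPathDict (grid : List (List Int)) (d : List Int) : PvMat :=
  let N := grid.length
  let M := (grid.headD []).length
  (List.range N).foldl (fun pd (cr : Nat) =>
    (List.range M).foldl (fun pd (cc : Nat) =>
      pd.insert ((cr : Int), (cc : Int))
        (pvPathRow (pvBuildVisited grid d N M cr cc) N M d.length)) pd) PySem.Dict.empty

-- A's acc_dict initialisation: starts with a nonempty path_dict row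
def pvStarts (pd : PvMat) : PvVec :=
  pd.items.foldl (fun a p => if p.2.items = [] then a else a.insert p.1 1) PySem.Dict.empty

-- A's inner accumulation 'if dest in target: target[dest] = (target[dest]+a*b)%P else: …'
def pvInnerA (a : Int) (row : List (PvCell × Int)) (n : PvVec) : PvVec :=
  row.foldl (fun n q =>
    if n.contains q.1 then n.insert q.1 (PySem.Int.mod (n.getD q.1 0 + a * q.2) pvP)
    else n.insert q.1 (PySem.Int.mod (a * q.2) pvP)) n

-- A's phase-3 'for current in acc_dict: for dest in dp[power][current]: …'
def pvVecMatA (acc : PvVec) (mp : PvMat) : PvVec :=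
  acc.items.foldl (fun na p => pvInnerA p.2 ((mp.getD p.1 PySem.Dict.empty).items) na)
    PySem.Dict.empty

-- A's dp[power] row loop: 'for mid in dp[prev][current]: if mid in dp[prev]: for dest in …'
def pvSquareA (mq : PvMat) : PvMat :=
  mq.items.foldl (fun np p =>
    np.insert p.1 (p.2.items.foldl (fun nrow q =>
      if mq.contains q.1 then pvInnerA q.2 ((mq.getD q.1 PySem.Dict.empty).items) nrow
      else nrow) PySem.Dict.empty)) PySem.Dict.empty

-- A's entry-by-entry copy of path_dict into dp[0]
def pvCopyMat (pd : PvMat) : PvMat :=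
  pd.items.foldl (fun m p =>
    m.insert p.1 (p.2.items.foldl (fun r q => r.insert q.1 q.2) PySem.Dict.empty))
    PySem.Dict.empty

-- dp[power] = square(dp[power-1]), powers 0..n
def pvDpList : Nat → PvMat → List PvMat
  | 0, m => [m]
  | n + 1, m => m :: pvDpList n (pvSquareA m)

-- 'while cycle + (1 << power) > k: power -= 1' (under Pre_ it never walks below 0)
def pvFindPower (cycle k : Int) : Nat → Nat
  | 0 => 0
  | p + 1 => if cycle + 2 ^ (p + 1) > k then pvFindPower cycle k p else p + 1

-- 'while cycle != k: …' (the guard cycle < k is the reachable form of cycle ≠ k under Pre_)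
def pvGreedy (dp : List PvMat) (k : Int) (cycle : Int) (power : Nat) (acc : PvVec) : PvVec :=
  if _h : cycle < k then
    let p := pvFindPower cycle k power
    pvGreedy dp k (cycle + 2 ^ p) p (pvVecMatA acc (dp.getD p PySem.Dict.empty))
  else acc
termination_by (k - cycle).toNat
decreasing_by
  have hp : (0 : Int) < 2 ^ pvFindPower cycle k power := pow_pos (by norm_num) _
  omega

def solution (grid : List (List Int)) (d : List Int) (k : Int) : Int :=
  let pd := pvBuildPathDict grid d
  let dp := pvDpList 30 (pvCopyMat pd)
  let accF := pvGreedy dp k 0 30 (pvStarts pd)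
  accF.items.foldl (fun ans p => PySem.Int.mod (ans + p.2) pvP) 0

-- ===== PORT B =====

-- cells = [(r, c) for r in range(N) for c in range(M)]
def pvCellsB (N M : Nat) : List PvCell :=
  (List.range N).flatMap (fun (r : Nat) => (List.range M).map (fun (c : Nat) => ((r : Int), (c : Int))))

-- step_matrix(h): adjacency matrix of one slope step with height difference h
def pvStepMatB (grid : List (List Int)) (N M : Nat) (h : Int) : PvMat :=
  (pvCellsB N M).foldl (fun mat u =>
    mat.insert u
      ([(u.1 - 1, u.2), (u.1 + 1, u.2), (u.1, u.2 - 1), (u.1, u.2 + 1)].foldl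
        (fun row (v : PvCell) =>
          if 0 ≤ v.1 ∧ v.1 < (N : Int) ∧ 0 ≤ v.2 ∧ v.2 < (M : Int) ∧
              (grid.getD v.1.toNat []).getD v.2.toNat 0
                - (grid.getD u.1.toNat []).getD u.2.toNat 0 = h then
            row.insert v 1 else row)
        PySem.Dict.empty)) PySem.Dict.empty

-- mat_mul's inner double loop over one row of X (also B's final starts·P loop)
def pvVecMatB (vec : PvVec) (mat : PvMat) : PvVec :=
  vec.items.foldl (fun out p =>
    ((mat.getD p.1 PySem.Dict.empty).items).foldl (fun out q =>
      out.insert q.1 (PySem.Int.mod (out.getD q.1 0 + p.2 * q.2) pvP)) out) PySem.Dict.empty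

-- mat_mul(X, Y): sparse matrix product, mod MOD
def pvMatMulB (X Y : PvMat) : PvMat :=
  X.items.foldl (fun out p => out.insert p.1 (pvVecMatB p.2 Y)) PySem.Dict.empty

-- T = {u: {u: 1} for u in cells}
def pvIdentB (cells : List PvCell) : PvMat :=
  cells.foldl (fun t u => t.insert u (PySem.Dict.empty.insert u 1)) PySem.Dict.empty

-- starts = {u: 1 for u, row in T.items() if any(row.values())}
def pvStartsB (T : PvMat) : PvVec :=
  T.items.foldl (fun s p =>
    if p.2.values.any (fun x => decide (x ≠ 0)) then s.insert p.1 1 else s) PySem.Dict.empty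

-- mat_pow(X, e), e ≥ 1 at every call site; the guard e ≤ 1 agrees with Python's
-- 'e == 1' on the reachable domain and makes the recursion total
def pvMatPowB (X : PvMat) (e : Int) : PvMat :=
  if _h : e ≤ 1 then X
  else
    let H := pvMatPowB X (PySem.Int.floordiv e 2)
    let S := pvMatMulB H H
    if PySem.Int.mod e 2 ≠ 0 then pvMatMulB S X else S
termination_by e.toNat
decreasing_by
  have h2 : PySem.Int.floordiv e 2 = e / 2 := PySem.Int.floordiv_eq_ediv_of_pos (by norm_num)
  omega

def solution_alt (grid : List (List Int)) (d : List Int) (k : Int) : Int :=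
  let N := grid.length
  let M := (grid.headD []).length
  let T := d.foldl (fun T h => pvMatMulB T (pvStepMatB grid N M h)) (pvIdentB (pvCellsB N M))
  let starts := pvStartsB T
  if k = 0 then PySem.Int.mod (starts.size : Int) pvP
  else PySem.Int.mod (pvVecMatB starts (pvMatPowB T k)).values.sum pvP

-- ===== PRECONDITION & SPEC =====

-- Pre_ excludes the inputs where the Python A raises: an empty grid (grid[0] →
-- IndexError), k < 0 (the power pointer walks below 0 and 1 << power → ValueError),
-- and ragged grids (a row shorter than row 0 makes grid[nr][nc] raise IndexError);
-- it excludes ALL ragged grids, including the few where the BFS happens never to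
-- index the missing cells (e.g. d = []) and A returns — both programs return the
-- same value there (see the cite in claim.json).
def Pre_solution (grid : List (List Int)) (d : List Int) (k : Int) : Prop :=
  grid ≠ [] ∧ 0 ≤ k ∧ ∀ row ∈ grid, (grid.headD []).length ≤ row.length

instance (grid : List (List Int)) (d : List Int) (k : Int) : Decidable (Pre_solution grid d k) := by
  unfold Pre_solution; infer_instance

def pvWitness_solution : List (List Int) × List Int × Int := ([[0, 1], [1, 0]], [1, -1], 3)

def Spec_solution (grid : List (List Int)) (d : List Int) (k : Int) (out : Int) : Prop :=
  out = solution_alt grid d k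
instance (grid : List (List Int)) (d : List Int) (k : Int) (out : Int) :
    Decidable (Spec_solution grid d k out) := by unfold Spec_solution; infer_instance

-- ===== CLAIM (what is proved, stated in full; the proofs are below) =====
def Claim_equal_solution : Prop := ∀ (grid : List (List Int)) (d : List Int) (k : Int),
  Dom_solution grid d k → Pre_solution grid d k → Spec_solution grid d k (solution grid d k)

-- ===== LEMMAS AND PROOFS =====

-- Semantic layer: dict vectors/matrices as functions into ZMod 1000000007,
-- sums taken over the fixed cell list of the grid.

abbrev PvZ := ZMod 1000000007

def pvVal (v : PvVec) : PvCell → PvZ := fun c => ((v.getD c 0 : Int) : PvZ)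

def pvMVal (m : PvMat) : PvCell → PvCell → PvZ := fun i => pvVal (m.getD i PySem.Dict.empty)

def pvVMul (cs : List PvCell) (v : PvCell → PvZ) (A : PvCell → PvCell → PvZ) : PvCell → PvZ :=
  fun j => (cs.map (fun i => v i * A i j)).sum

def pvMMul (cs : List PvCell) (A B : PvCell → PvCell → PvZ) : PvCell → PvCell → PvZ :=
  fun i => pvVMul cs (A i) B

def pvStepF (cs : List PvCell) (A : PvCell → PvCell → PvZ) :
    (PvCell → PvZ) → (PvCell → PvZ) := fun v => pvVMul cs v A

def pvGood (cs : List PvCell) (v : PvVec) : Prop :=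
  v.keys.Nodup ∧ ∀ c ∈ v.keys, c ∈ cs

def pvGoodM (cs : List PvCell) (m : PvMat) : Prop :=
  m.keys.Nodup ∧ (∀ c ∈ m.keys, c ∈ cs) ∧ ∀ i, pvGood cs (m.getD i PySem.Dict.empty)

def pvLVal : List (PvCell × Int) → PvCell → PvZ
  | [], _ => 0
  | q :: t, j => if j = q.1 then (q.2 : PvZ) else pvLVal t j

-- the square used by A's dp table, as a proof-layer abbreviation
def pvSq (m : PvMat) : PvMat := pvMatMulB m m

theorem pv_mem_cells (N M : Nat) (x : PvCell) :
    x ∈ pvCellsB N M ↔ ∃ r < N, ∃ c < M, x = ((r : Int), (c : Int)) := by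
  unfold pvCellsB
  rw [List.mem_flatMap]
  constructor
  · rintro ⟨r, hr, hx⟩
    rw [List.mem_map] at hx
    obtain ⟨c, hc, rfl⟩ := hx
    exact ⟨r, List.mem_range.mp hr, c, List.mem_range.mp hc, rfl⟩
  · rintro ⟨r, hr, c, hc, rfl⟩
    exact ⟨r, List.mem_range.mpr hr, List.mem_map.mpr ⟨c, List.mem_range.mpr hc, rfl⟩⟩

theorem pv_cells_nodup (N M : Nat) : (pvCellsB N M).Nodup := by
  induction N with
  | zero => simp [pvCellsB]
  | succ n ih =>
      have hsplit : pvCellsB (n + 1) M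
          = pvCellsB n M ++ (List.range M).map (fun (c : Nat) => ((n : Int), (c : Int))) := by
        unfold pvCellsB
        rw [List.range_succ, List.flatMap_append]
        simp
      rw [hsplit]
      refine List.Nodup.append ih ?_ ?_
      · refine List.Nodup.map ?_ List.nodup_range
        intro a b h
        simpa using congrArg Prod.snd h
      · intro x hx hy
        obtain ⟨r, hr, c, _, rfl⟩ := (pv_mem_cells n M x).mp hx
        simp only [List.mem_map, List.mem_range] at hy
        obtain ⟨c', _, heq⟩ := hy
        have := congrArg Prod.fst heq
        simp at this
        omega

theorem pv_cast_mod (x : Int) : ((PySem.Int.mod x pvP : Int) : PvZ) = (x : PvZ) := by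
  rw [PySem.Int.mod_eq_emod_of_pos (b := pvP) (by norm_num [pvP])]
  have h : pvP = ((1000000007 : Nat) : Int) := by norm_num [pvP]
  rw [h]
  exact ZMod.intCast_mod x 1000000007

theorem pv_val_empty (j : PvCell) : pvVal PySem.Dict.empty j = 0 := by
  simp [pvVal, PySem.Dict.getD_empty]

theorem pv_items_empty : (PySem.Dict.empty : PvMat).items = [] := by
  rfl

theorem pv_items_emptyV : (PySem.Dict.empty : PvVec).items = [] := by
  rfl

theorem pv_lval_items (d : PvVec) (j : PvCell) : pvLVal d.items j = pvVal d j := by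
  obtain ⟨l⟩ := d
  induction l with
  | nil => simp [pvLVal, pvVal, PySem.Dict.getD_eq_get?_getD]; rfl
  | cons q t ih =>
      obtain ⟨qk, qv⟩ := q
      show pvLVal ((qk, qv) :: t) j = _
      simp only [pvLVal, pvVal, PySem.Dict.getD_eq_get?_getD, PySem.Dict.get?_mk_cons]
      by_cases h : j = qk
      · subst h
        simp
      · have hb : (qk == j) = false := by simp [Ne.symm h]
        simp only [if_neg h, hb, Bool.false_eq_true, if_false]
        simpa [pvVal, PySem.Dict.getD_eq_get?_getD] using ih

theorem pv_lval_zero (t : List (PvCell × Int)) (j : PvCell) (h : j ∉ t.map Prod.fst) :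
    pvLVal t j = 0 := by
  induction t with
  | nil => simp [pvLVal]
  | cons q t ih =>
      simp only [List.map_cons, List.mem_cons, not_or] at h
      simp only [pvLVal, if_neg h.1]
      exact ih h.2

theorem pv_good_empty (cs : List PvCell) : pvGood cs (PySem.Dict.empty : PvVec) := by
  constructor
  · simp [PySem.Dict.keys_empty]
  · simp [PySem.Dict.keys_empty]

theorem pv_good_insert (cs : List PvCell) (n : PvVec) (hn : pvGood cs n) (c : PvCell)
    (x : Int) (hc : c ∈ cs) : pvGood cs (n.insert c x) := by
  refine ⟨PySem.Dict.nodup_keys_insert _ _ _ hn.1, ?_⟩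
  intro c' hc'
  rcases (PySem.Dict.mem_keys_insert _ _ _ _).1 hc' with rfl | h
  · exact hc
  · exact hn.2 _ h

-- the inner accumulation loop, semantically
theorem pv_innerB_val (a : Int) :
    ∀ (row : List (PvCell × Int)), (row.map Prod.fst).Nodup →
      ∀ (n : PvVec) (j : PvCell),
        pvVal (row.foldl (fun out q =>
            out.insert q.1 (PySem.Int.mod (out.getD q.1 0 + a * q.2) pvP)) n) j
          = pvVal n j + (a : PvZ) * pvLVal row j := by
  intro row
  induction row with
  | nil => intro _ n j; simp [pvLVal]
  | cons q t ih =>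
      intro hnd n j
      simp only [List.map_cons, List.nodup_cons] at hnd
      simp only [List.foldl_cons]
      rw [ih hnd.2]
      simp only [pvLVal]
      by_cases h : j = q.1
      · subst h
        rw [pv_lval_zero t _ hnd.1]
        have hL : (if q.1 = q.1 then (q.2 : PvZ) else 0) = (q.2 : PvZ) := if_pos rfl
        rw [hL]
        have hD : (n.insert q.1 (PySem.Int.mod (n.getD q.1 0 + a * q.2) pvP)).getD q.1 0
            = PySem.Int.mod (n.getD q.1 0 + a * q.2) pvP := by
          rw [PySem.Dict.getD_insert]
          exact if_pos rfl
        simp only [pvVal]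
        rw [hD, pv_cast_mod]
        push_cast
        ring
      · rw [if_neg h]
        simp only [pvVal, PySem.Dict.getD_insert, if_neg h]

-- the whole vector*matrix loop, semantically (sum over the vector's items)
theorem pv_vecmatB_items (mat : PvMat)
    (hrows : ∀ i, ((mat.getD i PySem.Dict.empty).items.map Prod.fst).Nodup) :
    ∀ (l : List (PvCell × Int)) (n : PvVec) (j : PvCell),
      pvVal (l.foldl (fun out p =>
          ((mat.getD p.1 PySem.Dict.empty).items).foldl (fun out q =>
            out.insert q.1 (PySem.Int.mod (out.getD q.1 0 + p.2 * q.2) pvP)) out) n) j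
        = pvVal n j + (l.map (fun p => (p.2 : PvZ) * pvMVal mat p.1 j)).sum := by
  intro l
  induction l with
  | nil => intro n j; simp
  | cons p t ih =>
      intro n j
      simp only [List.foldl_cons, List.map_cons, List.sum_cons]
      rw [ih, pv_innerB_val p.2 _ (hrows p.1) n j, pv_lval_items]
      simp only [pvMVal]
      ring

theorem pv_sum_map_ite (cs : List PvCell) (hcs : cs.Nodup) (x : PvCell) (hx : x ∈ cs)
    (A B : PvCell → PvZ) :
    (cs.map (fun i => (if i = x then A i else B i))).sum = A x + (cs.map B).sum - B x := by
  induction cs with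
  | nil => simp at hx
  | cons y t ih =>
      simp only [List.nodup_cons] at hcs
      rcases List.mem_cons.mp hx with rfl | hxt
      · have hmap : t.map (fun i => if i = x then A i else B i) = t.map B := by
          apply List.map_congr_left; intro i hi
          rw [if_neg]; intro h; exact hcs.1 (h ▸ hi)
        simp only [List.map_cons, List.sum_cons, if_true]
        rw [hmap]; ring
      · have hyx : y ≠ x := fun h => hcs.1 (h ▸ hxt)
        simp only [List.map_cons, List.sum_cons, if_neg hyx]
        rw [ih hcs.2 hxt]; ring

theorem pv_sum_items_eq (cs : List PvCell) (hcs : cs.Nodup) (g : PvCell → PvZ) :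
    ∀ (l : List (PvCell × Int)), (l.map Prod.fst).Nodup → (∀ p ∈ l, p.1 ∈ cs) →
      (l.map (fun p => (p.2 : PvZ) * g p.1)).sum = (cs.map (fun i => pvLVal l i * g i)).sum := by
  intro l
  induction l with
  | nil => intro _ _; simp [pvLVal]
  | cons q t ih =>
      intro hnd hmem
      simp only [List.map_cons, List.nodup_cons] at hnd
      have hq1 : q.1 ∈ cs := hmem q (by simp)
      have hrest : ∀ p ∈ t, p.1 ∈ cs := fun p hp => hmem p (by simp [hp])
      simp only [List.map_cons, List.sum_cons]
      rw [ih hnd.2 hrest]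
      have hmap : (cs.map (fun i => pvLVal (q :: t) i * g i)).sum
          = (cs.map (fun i => if i = q.1 then (q.2 : PvZ) * g i else pvLVal t i * g i)).sum := by
        apply congrArg; apply List.map_congr_left; intro i _
        by_cases h : i = q.1 <;> simp [pvLVal, h]
      rw [hmap, pv_sum_map_ite cs hcs q.1 hq1, pv_lval_zero t q.1 hnd.1]
      ring

theorem pv_vecmatB_val (cs : List PvCell) (hcs : cs.Nodup) (acc : PvVec) (mat : PvMat)
    (hacc : pvGood cs acc)
    (hrows : ∀ i, ((mat.getD i PySem.Dict.empty).items.map Prod.fst).Nodup) :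
    pvVal (pvVecMatB acc mat) = pvVMul cs (pvVal acc) (pvMVal mat) := by
  funext j
  unfold pvVecMatB
  rw [pv_vecmatB_items mat hrows acc.items PySem.Dict.empty j, pv_val_empty, zero_add]
  have h1 : (acc.items.map Prod.fst).Nodup := by
    have := hacc.1; simpa [PySem.Dict.keys] using this
  have h2 : ∀ p ∈ acc.items, p.1 ∈ cs := fun p hp =>
    hacc.2 _ (PySem.Dict.mem_keys_of_mem_items _ hp)
  rw [pv_sum_items_eq cs hcs (fun i => pvMVal mat i j) acc.items h1 h2]
  unfold pvVMul
  apply congrArg; apply List.map_congr_left; intro i _; rw [pv_lval_items]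

theorem pv_good_vecmatB (cs : List PvCell) (acc : PvVec) (mat : PvMat)
    (hrows : ∀ i, pvGood cs (mat.getD i PySem.Dict.empty)) :
    pvGood cs (pvVecMatB acc mat) := by
  unfold pvVecMatB
  refine List.foldlRecOn _ _ (pv_good_empty cs) ?_
  intro b hb p _
  refine List.foldlRecOn _ _ hb ?_
  intro b2 hb2 q hq
  exact pv_good_insert cs b2 hb2 q.1 _ ((hrows p.1).2 _ (PySem.Dict.mem_keys_of_mem_items _ hq))

theorem pv_mul_items (X Y : PvMat) (hnd : X.keys.Nodup) :
    (pvMatMulB X Y).items = X.items.map (fun p => (p.1, pvVecMatB p.2 Y)) := by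
  have hk : (X.items.map Prod.fst).Nodup := by simpa [PySem.Dict.keys] using hnd
  have h1 := PySem.Dict.items_foldl_insert_fresh X.items Prod.fst
    (fun p => pvVecMatB p.2 Y) PySem.Dict.empty (fun a _ => by simp) hk
  simpa using h1

theorem pv_mul_keys (X Y : PvMat) (hnd : X.keys.Nodup) :
    (pvMatMulB X Y).keys = X.keys := by
  simp only [PySem.Dict.keys, pv_mul_items X Y hnd, List.map_map]
  rfl

theorem pv_mul_getD (X Y : PvMat) (hnd : X.keys.Nodup) (i : PvCell) :
    (pvMatMulB X Y).getD i PySem.Dict.empty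
      = if i ∈ X.keys then pvVecMatB (X.getD i PySem.Dict.empty) Y
        else PySem.Dict.empty := by
  by_cases hi : i ∈ X.keys
  · rw [if_pos hi]
    have hex : ∃ row, (i, row) ∈ X.items := by
      have := hi
      simp only [PySem.Dict.keys, List.mem_map] at this
      obtain ⟨p, hp, hfst⟩ := this
      exact ⟨p.2, by rw [← hfst]; simpa using hp⟩
    obtain ⟨row, hrow⟩ := hex
    have hgd : X.getD i PySem.Dict.empty = row := PySem.Dict.getD_of_mem_items _ hrow hnd _
    have hmem2 : (i, pvVecMatB row Y) ∈ (pvMatMulB X Y).items := by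
      rw [pv_mul_items X Y hnd]; exact List.mem_map.mpr ⟨(i, row), hrow, rfl⟩
    have hnd2 : (pvMatMulB X Y).keys.Nodup := by rw [pv_mul_keys X Y hnd]; exact hnd
    rw [PySem.Dict.getD_of_mem_items _ hmem2 hnd2, hgd]
  · rw [if_neg hi]
    apply PySem.Dict.getD_of_not_contains
    have hni : i ∉ (pvMatMulB X Y).keys := by rw [pv_mul_keys X Y hnd]; exact hi
    cases hc : (pvMatMulB X Y).contains i
    · rfl
    · exact absurd ((PySem.Dict.contains_iff_mem_keys _ _).1 hc) hni

theorem pv_goodM_mul (cs : List PvCell) (X Y : PvMat) (hX : pvGoodM cs X)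
    (hY : ∀ i, pvGood cs (Y.getD i PySem.Dict.empty)) : pvGoodM cs (pvMatMulB X Y) := by
  obtain ⟨h1, h2, _⟩ := hX
  refine ⟨?_, ?_, ?_⟩
  · rw [pv_mul_keys _ _ h1]; exact h1
  · rw [pv_mul_keys _ _ h1]; exact h2
  · intro i
    rw [pv_mul_getD _ _ h1 i]
    split_ifs with h'
    · exact pv_good_vecmatB cs _ _ hY
    · exact pv_good_empty cs

theorem pv_mval_mul (cs : List PvCell) (hcs : cs.Nodup) (X Y : PvMat)
    (hX : pvGoodM cs X) (hY : ∀ i, pvGood cs (Y.getD i PySem.Dict.empty)) :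
    pvMVal (pvMatMulB X Y) = pvMMul cs (pvMVal X) (pvMVal Y) := by
  funext i
  have hrownd : ∀ i', ((Y.getD i' PySem.Dict.empty).items.map Prod.fst).Nodup := by
    intro i'
    have := (hY i').1; simpa [PySem.Dict.keys] using this
  simp only [pvMVal, pvMMul]
  rw [pv_mul_getD _ _ hX.1 i]
  split_ifs with hi
  · exact pv_vecmatB_val cs hcs _ Y (hX.2.2 i) hrownd
  · have hcf : X.contains i = false := by
      cases hc : X.contains i
      · rfl
      · exact absurd ((PySem.Dict.contains_iff_mem_keys _ _).1 hc) hi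
    rw [PySem.Dict.getD_of_not_contains _ _ hcf]
    funext j
    simp [pvVMul, pv_val_empty]

theorem pv_sum_swap (l1 l2 : List PvCell) (F : PvCell → PvCell → PvZ) :
    (l1.map (fun m => (l2.map (fun i => F i m)).sum)).sum
      = (l2.map (fun i => (l1.map (fun m => F i m)).sum)).sum := by
  induction l1 with
  | nil => simp
  | cons m t ih => simp [List.sum_map_add, ih]

theorem pv_vmul_assoc (cs : List PvCell) (v : PvCell → PvZ) (A B : PvCell → PvCell → PvZ) :
    pvVMul cs (pvVMul cs v A) B = pvVMul cs v (pvMMul cs A B) := by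
  funext j
  simp only [pvVMul, pvMMul]
  calc (cs.map (fun m => (cs.map (fun i => v i * A i m)).sum * B m j)).sum
      = (cs.map (fun m => (cs.map (fun i => v i * A i m * B m j)).sum)).sum := by
        apply congrArg; apply List.map_congr_left; intro m _
        rw [← List.sum_map_mul_right]
    _ = (cs.map (fun i => (cs.map (fun m => v i * A i m * B m j)).sum)).sum :=
        pv_sum_swap cs cs (fun i m => v i * A i m * B m j)
    _ = (cs.map (fun i => v i * (cs.map (fun m => A i m * B m j)).sum)).sum := by
        apply congrArg; apply List.map_congr_left; intro i _
        rw [← List.sum_map_mul_left]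
        apply congrArg; apply List.map_congr_left; intro m _
        ring

theorem pv_step_mul (cs : List PvCell) (hcs : cs.Nodup) (X Y : PvMat)
    (hX : pvGoodM cs X) (hY : ∀ i, pvGood cs (Y.getD i PySem.Dict.empty)) :
    pvStepF cs (pvMVal (pvMatMulB X Y))
      = pvStepF cs (pvMVal Y) ∘ pvStepF cs (pvMVal X) := by
  funext v
  simp only [pvStepF, Function.comp_apply]
  rw [pv_mval_mul cs hcs X Y hX hY, ← pv_vmul_assoc]

theorem pv_goodM_iter_sq (cs : List PvCell) (mat : PvMat) (h : pvGoodM cs mat) (p : Nat) :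
    pvGoodM cs (pvSq^[p] mat) := by
  induction p with
  | zero => simpa using h
  | succ p ih =>
      rw [Function.iterate_succ_apply']
      exact pv_goodM_mul cs _ _ ih ih.2.2

theorem pv_step_iter_sq (cs : List PvCell) (hcs : cs.Nodup) (mat : PvMat)
    (h : pvGoodM cs mat) (p : Nat) :
    pvStepF cs (pvMVal (pvSq^[p] mat)) = (pvStepF cs (pvMVal mat))^[2 ^ p] := by
  induction p with
  | zero => simp
  | succ p ih =>
      rw [Function.iterate_succ_apply']
      have hg := pv_goodM_iter_sq cs mat h p
      rw [pvSq, pv_step_mul cs hcs _ _ hg hg.2.2, ih]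
      rw [← Function.iterate_add]
      congr 1
      rw [pow_succ]; ring

-- A's helpers compute the same dicts as B's vec_mat / mat_mul
theorem pv_innerA_eq (a : Int) (row : List (PvCell × Int)) (n : PvVec) :
    pvInnerA a row n = row.foldl (fun out q =>
      out.insert q.1 (PySem.Int.mod (out.getD q.1 0 + a * q.2) pvP)) n := by
  unfold pvInnerA
  have hstep : (fun (n : PvVec) (q : PvCell × Int) =>
      if n.contains q.1 then n.insert q.1 (PySem.Int.mod (n.getD q.1 0 + a * q.2) pvP)
      else n.insert q.1 (PySem.Int.mod (a * q.2) pvP))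
    = (fun (out : PvVec) (q : PvCell × Int) =>
        out.insert q.1 (PySem.Int.mod (out.getD q.1 0 + a * q.2) pvP)) := by
    funext n q
    by_cases h : n.contains q.1 = true
    · simp [h]
    · have hf : n.contains q.1 = false := by simpa using h
      simp [hf, PySem.Dict.getD_of_not_contains _ _ hf]
  rw [hstep]

theorem pv_vecmatA_eq (acc : PvVec) (mp : PvMat) : pvVecMatA acc mp = pvVecMatB acc mp := by
  unfold pvVecMatA pvVecMatB
  have hstep : (fun (na : PvVec) (p : PvCell × Int) =>
      pvInnerA p.2 ((mp.getD p.1 PySem.Dict.empty).items) na)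
    = (fun (out : PvVec) (p : PvCell × Int) =>
        ((mp.getD p.1 PySem.Dict.empty).items).foldl (fun out q =>
          out.insert q.1 (PySem.Int.mod (out.getD q.1 0 + p.2 * q.2) pvP)) out) := by
    funext na p; exact pv_innerA_eq p.2 _ na
  rw [hstep]

theorem pv_squareA_eq (mq : PvMat) : pvSquareA mq = pvSq mq := by
  unfold pvSquareA pvSq pvMatMulB
  have hstep2 : ∀ (r : PvVec), (fun (nrow : PvVec) (q : PvCell × Int) =>
      if mq.contains q.1 then pvInnerA q.2 ((mq.getD q.1 PySem.Dict.empty).items) nrow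
      else nrow)
    = (fun (out : PvVec) (q : PvCell × Int) =>
        ((mq.getD q.1 PySem.Dict.empty).items).foldl (fun out t =>
          out.insert t.1 (PySem.Int.mod (out.getD t.1 0 + q.2 * t.2) pvP)) out) := by
    intro r
    funext nrow q
    by_cases h : mq.contains q.1 = true
    · simp only [h, if_true]
      exact pv_innerA_eq q.2 _ nrow
    · have hf : mq.contains q.1 = false := by simpa using h
      simp only [hf, Bool.false_eq_true, if_false]
      rw [PySem.Dict.getD_of_not_contains _ _ hf]
      rfl
  have hstep : (fun (np : PvMat) (p : PvCell × PvVec) =>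
      np.insert p.1 (p.2.items.foldl (fun nrow q =>
        if mq.contains q.1 then pvInnerA q.2 ((mq.getD q.1 PySem.Dict.empty).items) nrow
        else nrow) PySem.Dict.empty))
    = (fun (out : PvMat) (p : PvCell × PvVec) => out.insert p.1 (pvVecMatB p.2 mq)) := by
    funext np p
    congr 1
    unfold pvVecMatB
    rw [hstep2 p.2]
  rw [hstep]

theorem pv_copy_eq (pd : PvMat) (hnd : pd.keys.Nodup)
    (hrows : ∀ i, (pd.getD i PySem.Dict.empty).keys.Nodup) : pvCopyMat pd = pd := by
  unfold pvCopyMat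
  have hk : (pd.items.map Prod.fst).Nodup := by simpa [PySem.Dict.keys] using hnd
  have hrow : ∀ p ∈ pd.items,
      (p.2.items.foldl (fun (r : PvVec) q => r.insert q.1 q.2) PySem.Dict.empty) = p.2 := by
    intro p hp
    have hgd := PySem.Dict.getD_of_mem_items pd hp hnd PySem.Dict.empty
    have hnd2 : p.2.keys.Nodup := hgd ▸ hrows p.1
    apply PySem.Dict.ext
    have h2 := PySem.Dict.items_foldl_insert_fresh p.2.items Prod.fst Prod.snd
      PySem.Dict.empty (fun a _ => by simp) (by simpa [PySem.Dict.keys] using hnd2)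
    simpa [pv_items_emptyV] using h2
  apply PySem.Dict.ext
  have h1 := PySem.Dict.items_foldl_insert_fresh pd.items Prod.fst
    (fun p => p.2.items.foldl (fun (r : PvVec) q => r.insert q.1 q.2) PySem.Dict.empty)
    PySem.Dict.empty (fun a _ => by simp) hk
  refine h1.trans ?_
  have hmap : pd.items.map (fun p =>
      (p.1, p.2.items.foldl (fun (r : PvVec) q => r.insert q.1 q.2) PySem.Dict.empty))
      = pd.items.map (fun p => (p.1, p.2)) :=
    List.map_congr_left (fun p hp => by rw [hrow p hp])
  simp [hmap, pv_items_empty]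

theorem pv_dplist_getD : ∀ (n p : Nat) (m : PvMat), p ≤ n →
    (pvDpList n m).getD p PySem.Dict.empty = pvSquareA^[p] m := by
  intro n
  induction n with
  | zero =>
      intro p m hp
      have : p = 0 := Nat.le_zero.mp hp
      subst this
      simp [pvDpList]
  | succ n ih =>
      intro p m hp
      cases p with
      | zero => simp [pvDpList]
      | succ p =>
          simp only [pvDpList, List.getD_cons_succ]
          rw [ih p _ (Nat.succ_le_succ_iff.mp hp), Function.iterate_succ_apply]

theorem pv_findPower_le (cycle k : Int) : ∀ p, pvFindPower cycle k p ≤ p := by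
  intro p
  induction p with
  | zero => simp [pvFindPower]
  | succ p ih =>
      rw [pvFindPower]
      split
      · exact Nat.le_succ_of_le ih
      · exact Nat.le_refl _

theorem pv_findPower_spec (cycle k : Int) (h : cycle < k) :
    ∀ p, cycle + 2 ^ (pvFindPower cycle k p) ≤ k := by
  intro p
  induction p with
  | zero => simp only [pvFindPower, pow_zero]; omega
  | succ p ih =>
      rw [pvFindPower]
      split
      · exact ih
      · next hcond => exact not_lt.mp hcond

theorem pv_greedy_val (cs : List PvCell) (hcs : cs.Nodup) (dpb : PvMat)
    (hgood : pvGoodM cs dpb) (k : Int) :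
    ∀ (n : Nat) (cycle : Int) (power : Nat) (acc : PvVec), (k - cycle).toNat = n →
      power ≤ 30 → pvGood cs acc →
      pvVal (pvGreedy (pvDpList 30 dpb) k cycle power acc)
        = (pvStepF cs (pvMVal dpb))^[(k - cycle).toNat] (pvVal acc) := by
  intro n
  induction n using Nat.strong_induction_on with
  | _ n ih =>
    intro cycle power acc hn hpower hacc
    rw [pvGreedy]
    by_cases h : cycle < k
    · rw [dif_pos h]
      set p := pvFindPower cycle k power with hp
      have hple : p ≤ 30 := le_trans (pv_findPower_le cycle k power) hpower
      have hspec : cycle + 2 ^ p ≤ k := pv_findPower_spec cycle k h power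
      have h2p : (0 : Int) < 2 ^ p := pow_pos (by norm_num) p
      have h2pt : ((2 : Int) ^ p).toNat = 2 ^ p := by
        have hcast : (2 : Int) ^ p = ((2 ^ p : Nat) : Int) := by push_cast; ring
        rw [hcast, Int.toNat_natCast]
      have hlt : (k - (cycle + 2 ^ p)).toNat < n := by omega
      have hdp : (pvDpList 30 dpb).getD p PySem.Dict.empty = pvSq^[p] dpb := by
        rw [pv_dplist_getD 30 p dpb hple]
        have hsq : pvSquareA = pvSq := funext pv_squareA_eq
        rw [hsq]
      have hrows : ∀ i, pvGood cs ((pvSq^[p] dpb).getD i PySem.Dict.empty) :=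
        (pv_goodM_iter_sq cs dpb hgood p).2.2
      have hrownd : ∀ i, (((pvSq^[p] dpb).getD i PySem.Dict.empty).items.map Prod.fst).Nodup := by
        intro i; have := (hrows i).1; simpa [PySem.Dict.keys] using this
      have hgood' : pvGood cs (pvVecMatA acc ((pvDpList 30 dpb).getD p PySem.Dict.empty)) := by
        rw [pv_vecmatA_eq, hdp]
        exact pv_good_vecmatB cs _ _ hrows
      rw [ih _ hlt (cycle + 2 ^ p) p _ rfl hple hgood']
      have hvalacc' : pvVal (pvVecMatA acc ((pvDpList 30 dpb).getD p PySem.Dict.empty))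
          = (pvStepF cs (pvMVal dpb))^[2 ^ p] (pvVal acc) := by
        rw [pv_vecmatA_eq, hdp]
        rw [pv_vecmatB_val cs hcs acc _ hacc hrownd]
        have hstep := pv_step_iter_sq cs hcs dpb hgood p
        calc pvVMul cs (pvVal acc) (pvMVal (pvSq^[p] dpb))
            = pvStepF cs (pvMVal (pvSq^[p] dpb)) (pvVal acc) := rfl
          _ = (pvStepF cs (pvMVal dpb))^[2 ^ p] (pvVal acc) := by rw [hstep]
      rw [hvalacc', ← Function.iterate_add_apply]
      congr 1
      rw [← h2pt]
      omega
    · rw [dif_neg h]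
      have h0 : (k - cycle).toNat = 0 := by omega
      rw [h0]
      rfl

theorem pv_greedy_good (cs : List PvCell) (dpb : PvMat) (hgood : pvGoodM cs dpb) (k : Int) :
    ∀ (n : Nat) (cycle : Int) (power : Nat) (acc : PvVec), (k - cycle).toNat = n →
      power ≤ 30 → pvGood cs acc → pvGood cs (pvGreedy (pvDpList 30 dpb) k cycle power acc) := by
  intro n
  induction n using Nat.strong_induction_on with
  | _ n ih =>
    intro cycle power acc hn hpower hacc
    rw [pvGreedy]
    by_cases h : cycle < k
    · rw [dif_pos h]
      set p := pvFindPower cycle k power with hp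
      have hple : p ≤ 30 := le_trans (pv_findPower_le cycle k power) hpower
      have hspec : cycle + 2 ^ p ≤ k := pv_findPower_spec cycle k h power
      have h2p : (0 : Int) < 2 ^ p := pow_pos (by norm_num) p
      have hlt : (k - (cycle + 2 ^ p)).toNat < n := by omega
      have hdp : (pvDpList 30 dpb).getD p PySem.Dict.empty = pvSq^[p] dpb := by
        rw [pv_dplist_getD 30 p dpb hple]
        have hsq : pvSquareA = pvSq := funext pv_squareA_eq
        rw [hsq]
      have hgood' : pvGood cs (pvVecMatA acc ((pvDpList 30 dpb).getD p PySem.Dict.empty)) := by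
        rw [pv_vecmatA_eq, hdp]
        exact pv_good_vecmatB cs _ _ (pv_goodM_iter_sq cs dpb hgood p).2.2
      exact ih _ hlt (cycle + 2 ^ p) p _ rfl hple hgood'
    · rw [dif_neg h]
      exact hacc

theorem pv_folda_sum : ∀ (l : List (PvCell × Int)) (init : Int), 0 ≤ init → init < pvP →
    0 ≤ l.foldl (fun ans p => PySem.Int.mod (ans + p.2) pvP) init ∧
    l.foldl (fun ans p => PySem.Int.mod (ans + p.2) pvP) init < pvP ∧
    ((l.foldl (fun ans p => PySem.Int.mod (ans + p.2) pvP) init : Int) : PvZ)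
      = (init : PvZ) + (l.map (fun p => (p.2 : PvZ))).sum := by
  intro l
  induction l with
  | nil => intro init h1 h2; refine ⟨h1, h2, by simp⟩
  | cons q t ih =>
      intro init h1 h2
      simp only [List.foldl_cons, List.map_cons, List.sum_cons]
      have hm1 : 0 ≤ PySem.Int.mod (init + q.2) pvP :=
        PySem.Int.mod_nonneg _ (by norm_num [pvP])
      have hm2 : PySem.Int.mod (init + q.2) pvP < pvP :=
        PySem.Int.mod_lt _ (by norm_num [pvP])
      obtain ⟨a1, a2, a3⟩ := ih _ hm1 hm2
      refine ⟨a1, a2, ?_⟩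
      rw [a3, pv_cast_mod]
      push_cast
      ring

theorem pv_tot_eq (cs : List PvCell) (hcs : cs.Nodup) (acc : PvVec) (hacc : pvGood cs acc) :
    (acc.items.map (fun p => (p.2 : PvZ))).sum = (cs.map (fun i => pvVal acc i)).sum := by
  have h1 : (acc.items.map Prod.fst).Nodup := by
    have := hacc.1; simpa [PySem.Dict.keys] using this
  have h2 : ∀ p ∈ acc.items, p.1 ∈ cs := fun p hp =>
    hacc.2 _ (PySem.Dict.mem_keys_of_mem_items _ hp)
  have h3 := pv_sum_items_eq cs hcs (fun _ => 1) acc.items h1 h2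
  simp only [mul_one] at h3
  rw [h3]
  apply congrArg; apply List.map_congr_left; intro i _; rw [pv_lval_items]

theorem pv_int_eq_of_cast (a b : Int) (ha : 0 ≤ a) (ha' : a < pvP) (hb : 0 ≤ b)
    (hb' : b < pvP) (h : (a : PvZ) = (b : PvZ)) : a = b := by
  have hd : ((1000000007 : ℕ) : Int) ∣ b - a :=
    ((ZMod.intCast_eq_intCast_iff a b 1000000007).mp h).dvd
  have hz : b - a = 0 := by
    apply Int.eq_zero_of_abs_lt_dvd hd
    have hP : pvP = 1000000007 := rfl
    rw [hP] at ha' hb'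
    have habs : |b - a| < 1000000007 := abs_lt.mpr ⟨by omega, by omega⟩
    simpa using habs
  omega


-- ===== generic lemmas about conditional-insert folds over a key list =====

theorem pv_cif_val (cnd : PvCell → Prop) [DecidablePred cnd] (f : PvCell → Int) :
    ∀ (ks : List PvCell) (row0 : PvVec) (v : PvCell),
      pvVal (ks.foldl (fun row w => if cnd w then row.insert w (f w) else row) row0) v
        = if v ∈ ks ∧ cnd v then ((f v : Int) : PvZ) else pvVal row0 v := by
  intro ks
  induction ks with
  | nil => intro row0 v; simp
  | cons w t ih =>
      intro row0 v
      simp only [List.foldl_cons]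
      rw [ih]
      by_cases hvt : v ∈ t ∧ cnd v
      · rw [if_pos hvt, if_pos ⟨List.mem_cons_of_mem _ hvt.1, hvt.2⟩]
      · rw [if_neg hvt]
        by_cases hw : cnd w
        · rw [if_pos hw]
          by_cases hvw : v = w
          · subst hvw
            rw [if_pos ⟨List.mem_cons_self, hw⟩]
            simp [pvVal, PySem.Dict.getD_insert]
          · have hnc : ¬ (v ∈ w :: t ∧ cnd v) := by
              rintro ⟨hm, hc⟩
              rcases List.mem_cons.mp hm with rfl | hm2
              · exact hvw rfl
              · exact hvt ⟨hm2, hc⟩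
            rw [if_neg hnc]
            simp [pvVal, PySem.Dict.getD_insert, hvw]
        · rw [if_neg hw]
          have hnc : ¬ (v ∈ w :: t ∧ cnd v) := by
            rintro ⟨hm, hc⟩
            rcases List.mem_cons.mp hm with rfl | hm2
            · exact hw hc
            · exact hvt ⟨hm2, hc⟩
          rw [if_neg hnc]

theorem pv_cif_good (cs : List PvCell) (cnd : PvCell → Prop) [DecidablePred cnd]
    (f : PvCell → Int) (ks : List PvCell) (hks : ∀ w ∈ ks, cnd w → w ∈ cs) (row0 : PvVec)
    (h0 : pvGood cs row0) :
    pvGood cs (ks.foldl (fun row w => if cnd w then row.insert w (f w) else row) row0) := by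
  refine List.foldlRecOn _ _ h0 ?_
  intro b hb w hw
  split_ifs with hc
  · exact pv_good_insert cs b hb w _ (hks w hw hc)
  · exact hb

theorem pv_cif_items (cnd : PvCell → Prop) [DecidablePred cnd] (f : PvCell → Int)
    (ks : List PvCell) (row0 : PvVec) :
    ∀ p ∈ (ks.foldl (fun row w => if cnd w then row.insert w (f w) else row) row0).items,
      p ∈ row0.items ∨ (p.1 ∈ ks ∧ cnd p.1 ∧ p.2 = f p.1) := by
  induction ks generalizing row0 with
  | nil => intro p hp; exact Or.inl hp
  | cons w t ih =>
      intro p hp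
      simp only [List.foldl_cons] at hp
      rcases ih _ p hp with hmem | ⟨hk, hc, hv⟩
      · by_cases hc : cnd w
        · rw [if_pos hc] at hmem
          rcases (PySem.Dict.mem_items_insert _ _ _ _).1 hmem with rfl | ⟨hpb, _⟩
          · exact Or.inr ⟨List.mem_cons_self, hc, rfl⟩
          · exact Or.inl hpb
        · rw [if_neg hc] at hmem
          exact Or.inl hmem
      · exact Or.inr ⟨List.mem_cons_of_mem _ hk, hc, hv⟩

theorem pv_cif_nodup (cnd : PvCell → Prop) [DecidablePred cnd] (f : PvCell → Int)
    (ks : List PvCell) (row0 : PvVec) (h0 : row0.keys.Nodup) :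
    (ks.foldl (fun row w => if cnd w then row.insert w (f w) else row) row0).keys.Nodup := by
  refine List.foldlRecOn (motive := fun (b : PvVec) => b.keys.Nodup) _ _ h0 ?_
  intro b hb w _
  split_ifs
  · exact PySem.Dict.nodup_keys_insert _ _ _ hb
  · exact hb

-- ===== folds inserting fresh rows for each key of a nodup list =====

theorem pv_fresh_items (F : PvCell → PvVec) (ks : List PvCell) (hnd : ks.Nodup) :
    (ks.foldl (fun m u => m.insert u (F u)) (PySem.Dict.empty : PvMat)).items
      = ks.map (fun u => (u, F u)) := by
  have h := PySem.Dict.items_foldl_insert_fresh ks (fun u => u) F PySem.Dict.empty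
    (fun a _ => by simp) (by simpa using hnd)
  simpa using h

theorem pv_fresh_keys (F : PvCell → PvVec) (ks : List PvCell) (hnd : ks.Nodup) :
    (ks.foldl (fun m u => m.insert u (F u)) (PySem.Dict.empty : PvMat)).keys = ks := by
  simp only [PySem.Dict.keys, pv_fresh_items F ks hnd, List.map_map]
  have hcomp : ((fun p : PvCell × PvVec => p.1) ∘ fun u => (u, F u)) = id := rfl
  rw [hcomp, List.map_id]

theorem pv_fresh_getD (F : PvCell → PvVec) (ks : List PvCell) (hnd : ks.Nodup) (i : PvCell) :
    (ks.foldl (fun m u => m.insert u (F u)) (PySem.Dict.empty : PvMat)).getD i PySem.Dict.empty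
      = if i ∈ ks then F i else PySem.Dict.empty := by
  set X := ks.foldl (fun m u => m.insert u (F u)) (PySem.Dict.empty : PvMat) with hX
  have hknd : X.keys.Nodup := by rw [hX, pv_fresh_keys F ks hnd]; exact hnd
  by_cases hi : i ∈ ks
  · rw [if_pos hi]
    have hmem : (i, F i) ∈ X.items := by
      rw [hX, pv_fresh_items F ks hnd]
      exact List.mem_map.mpr ⟨i, hi, rfl⟩
    exact PySem.Dict.getD_of_mem_items _ hmem hknd _
  · rw [if_neg hi]
    apply PySem.Dict.getD_of_not_contains
    have hni : i ∉ X.keys := by rw [hX, pv_fresh_keys F ks hnd]; exact hi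
    cases hc : X.contains i
    · rfl
    · exact absurd ((PySem.Dict.contains_iff_mem_keys _ _).1 hc) hni

-- ===== B's step matrices, identity and transition fold, semantically =====

def pvCands (u : PvCell) : List PvCell :=
  [(u.1 - 1, u.2), (u.1 + 1, u.2), (u.1, u.2 - 1), (u.1, u.2 + 1)]

abbrev pvOk (grid : List (List Int)) (N M : Nat) (h : Int) (u v : PvCell) : Prop :=
  0 ≤ v.1 ∧ v.1 < (N : Int) ∧ 0 ≤ v.2 ∧ v.2 < (M : Int) ∧
    (grid.getD v.1.toNat []).getD v.2.toNat 0 - (grid.getD u.1.toNat []).getD u.2.toNat 0 = h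

def pvAdj (grid : List (List Int)) (N M : Nat) (h : Int) (u v : PvCell) : PvZ :=
  if v ∈ pvCands u ∧ pvOk grid N M h u v then 1 else 0

def pvE (u : PvCell) : PvCell → PvZ := fun v => if v = u then 1 else 0

def pvStepRow (grid : List (List Int)) (N M : Nat) (h : Int) (u : PvCell) : PvVec :=
  (pvCands u).foldl (fun row v => if pvOk grid N M h u v then row.insert v 1 else row)
    PySem.Dict.empty

theorem pv_ok_mem (grid : List (List Int)) (N M : Nat) (h : Int) (u v : PvCell)
    (hok : pvOk grid N M h u v) : v ∈ pvCellsB N M := by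
  obtain ⟨h1, h2, h3, h4, _⟩ := hok
  rw [pv_mem_cells]
  refine ⟨v.1.toNat, by omega, v.2.toNat, by omega, ?_⟩
  obtain ⟨a, b⟩ := v
  simp only [Prod.mk.injEq]
  constructor <;> omega

theorem pv_stepmat_eq (grid : List (List Int)) (N M : Nat) (h : Int) :
    pvStepMatB grid N M h
      = (pvCellsB N M).foldl (fun m u => m.insert u (pvStepRow grid N M h u))
          PySem.Dict.empty := rfl

theorem pv_steprow_val (grid : List (List Int)) (N M : Nat) (h : Int) (u v : PvCell) :
    pvVal (pvStepRow grid N M h u) v = pvAdj grid N M h u v := by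
  unfold pvStepRow pvAdj
  rw [pv_cif_val (pvOk grid N M h u) (fun _ => 1) (pvCands u) PySem.Dict.empty v]
  by_cases hc : v ∈ pvCands u ∧ pvOk grid N M h u v
  · rw [if_pos hc, if_pos hc]; norm_num
  · rw [if_neg hc, if_neg hc]; exact pv_val_empty v

theorem pv_steprow_good (grid : List (List Int)) (N M : Nat) (h : Int) (u : PvCell) :
    pvGood (pvCellsB N M) (pvStepRow grid N M h u) := by
  unfold pvStepRow
  exact pv_cif_good _ _ _ _ (fun w _ hw => pv_ok_mem grid N M h u w hw) _
    (pv_good_empty _)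

theorem pv_stepmat_good (grid : List (List Int)) (N M : Nat) (h : Int) (i : PvCell) :
    pvGood (pvCellsB N M) ((pvStepMatB grid N M h).getD i PySem.Dict.empty) := by
  rw [pv_stepmat_eq, pv_fresh_getD _ _ (pv_cells_nodup N M) i]
  split_ifs
  · exact pv_steprow_good grid N M h i
  · exact pv_good_empty _

theorem pv_stepmat_val (grid : List (List Int)) (N M : Nat) (h : Int) (i : PvCell)
    (hi : i ∈ pvCellsB N M) :
    pvMVal (pvStepMatB grid N M h) i = pvAdj grid N M h i := by
  funext j
  simp only [pvMVal]
  rw [pv_stepmat_eq, pv_fresh_getD _ _ (pv_cells_nodup N M) i, if_pos hi]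
  exact pv_steprow_val grid N M h i j

theorem pv_ident_getD (cells : List PvCell) (hnd : cells.Nodup) (i : PvCell) :
    (pvIdentB cells).getD i PySem.Dict.empty
      = if i ∈ cells then PySem.Dict.empty.insert i 1 else PySem.Dict.empty :=
  pv_fresh_getD _ _ hnd i

theorem pv_single_val (u v : PvCell) :
    pvVal (PySem.Dict.empty.insert u (1 : Int)) v = pvE u v := by
  simp only [pvVal, pvE, PySem.Dict.getD_insert]
  split_ifs <;> simp

theorem pv_ident_val (cells : List PvCell) (hnd : cells.Nodup) (i : PvCell) (hi : i ∈ cells) :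
    pvMVal (pvIdentB cells) i = pvE i := by
  funext j
  simp only [pvMVal]
  rw [pv_ident_getD cells hnd i, if_pos hi]
  exact pv_single_val i j

theorem pv_ident_goodM (N M : Nat) : pvGoodM (pvCellsB N M) (pvIdentB (pvCellsB N M)) := by
  refine ⟨?_, ?_, ?_⟩
  · rw [pvIdentB, pv_fresh_keys _ _ (pv_cells_nodup N M)]; exact pv_cells_nodup N M
  · rw [pvIdentB, pv_fresh_keys _ _ (pv_cells_nodup N M)]; exact fun c hc => hc
  · intro i
    rw [pvIdentB, pv_fresh_getD _ _ (pv_cells_nodup N M) i]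
    split_ifs with hi
    · exact pv_good_insert _ _ (pv_good_empty _) i 1 hi
    · exact pv_good_empty _

-- value ranges of the rows of B's matrices
def pvRRange (m : PvMat) : Prop :=
  ∀ i, ∀ p ∈ (m.getD i PySem.Dict.empty).items, 0 ≤ p.2 ∧ p.2 < pvP

theorem pv_vecmatB_range (x : PvVec) (Y : PvMat) :
    ∀ p ∈ (pvVecMatB x Y).items, 0 ≤ p.2 ∧ p.2 < pvP := by
  unfold pvVecMatB
  refine List.foldlRecOn (motive := fun (b : PvVec) => ∀ p ∈ b.items, 0 ≤ p.2 ∧ p.2 < pvP)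
    _ _ (by intro p hp; simp [pv_items_emptyV] at hp) ?_
  intro b hb q _
  refine List.foldlRecOn (motive := fun (b : PvVec) => ∀ p ∈ b.items, 0 ≤ p.2 ∧ p.2 < pvP)
    _ _ hb ?_
  intro b2 hb2 t _ p hp
  rcases (PySem.Dict.mem_items_insert _ _ _ _).1 hp with rfl | ⟨hpb, _⟩
  · exact ⟨PySem.Int.mod_nonneg _ (by norm_num [pvP]), PySem.Int.mod_lt _ (by norm_num [pvP])⟩
  · exact hb2 p hpb

theorem pv_rrange_mul (X Y : PvMat) (hnd : X.keys.Nodup) : pvRRange (pvMatMulB X Y) := by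
  intro i p hp
  rw [pv_mul_getD X Y hnd i] at hp
  split_ifs at hp with hi
  · exact pv_vecmatB_range _ Y p hp
  · simp [pv_items_emptyV] at hp

theorem pv_rrange_ident (N M : Nat) : pvRRange (pvIdentB (pvCellsB N M)) := by
  intro i p hp
  rw [pv_ident_getD _ (pv_cells_nodup N M) i] at hp
  split_ifs at hp with hi
  · rcases (PySem.Dict.mem_items_insert _ _ _ _).1 hp with rfl | ⟨hpb, _⟩
    · norm_num [pvP]
    · simp [pv_items_emptyV] at hpb
  · simp [pv_items_emptyV] at hp

-- iterating the adjacency step over a list of height differences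
def pvIter (cs : List PvCell) (grid : List (List Int)) (N M : Nat) (hs : List Int)
    (g : PvCell → PvZ) : PvCell → PvZ :=
  hs.foldl (fun g h => pvVMul cs g (pvAdj grid N M h)) g

theorem pv_Tfold (grid : List (List Int)) (N M : Nat) :
    ∀ (hs : List Int) (T0 : PvMat) (G : PvCell → PvCell → PvZ),
      pvGoodM (pvCellsB N M) T0 → pvRRange T0 → (∀ u, pvMVal T0 u = G u) →
      pvGoodM (pvCellsB N M)
          (hs.foldl (fun T h => pvMatMulB T (pvStepMatB grid N M h)) T0) ∧
        pvRRange (hs.foldl (fun T h => pvMatMulB T (pvStepMatB grid N M h)) T0) ∧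
        ∀ u, pvMVal (hs.foldl (fun T h => pvMatMulB T (pvStepMatB grid N M h)) T0) u
          = pvIter (pvCellsB N M) grid N M hs (G u) := by
  intro hs
  induction hs with
  | nil => intro T0 G h1 h2 h3; exact ⟨h1, h2, fun u => h3 u⟩
  | cons h t ih =>
      intro T0 G h1 h2 h3
      simp only [List.foldl_cons]
      have hrows : ∀ i, pvGood (pvCellsB N M)
          ((pvStepMatB grid N M h).getD i PySem.Dict.empty) := pv_stepmat_good grid N M h
      have hg1 : pvGoodM (pvCellsB N M) (pvMatMulB T0 (pvStepMatB grid N M h)) :=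
        pv_goodM_mul _ _ _ h1 hrows
      have hr1 : pvRRange (pvMatMulB T0 (pvStepMatB grid N M h)) := pv_rrange_mul _ _ h1.1
      have hv1 : ∀ u, pvMVal (pvMatMulB T0 (pvStepMatB grid N M h)) u
          = pvVMul (pvCellsB N M) (G u) (pvAdj grid N M h) := by
        intro u
        have := pv_mval_mul (pvCellsB N M) (pv_cells_nodup N M) T0 (pvStepMatB grid N M h)
          h1 hrows
        have hu := congrFun this u
        rw [hu]
        simp only [pvMMul]
        funext j
        simp only [pvVMul]
        apply congrArg
        apply List.map_congr_left
        intro i hi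
        rw [h3 u, pv_stepmat_val grid N M h i hi]
      have := ih (pvMatMulB T0 (pvStepMatB grid N M h))
        (fun u => pvVMul (pvCellsB N M) (G u) (pvAdj grid N M h)) hg1 hr1 hv1
      exact ⟨this.1, this.2.1, fun u => this.2.2 u⟩

-- ===== mat_pow, semantically =====

theorem pv_matpow_good (cs : List PvCell) (X : PvMat) (hX : pvGoodM cs X) :
    ∀ (n : Nat) (e : Int), e.toNat = n → pvGoodM cs (pvMatPowB X e) := by
  intro n
  induction n using Nat.strong_induction_on with
  | _ n ih =>
    intro e hn
    rw [pvMatPowB]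
    by_cases h1 : e ≤ 1
    · rw [dif_pos h1]; exact hX
    · rw [dif_neg h1]
      have hq : PySem.Int.floordiv e 2 = e / 2 :=
        PySem.Int.floordiv_eq_ediv_of_pos (by norm_num)
      have hlt : (e / 2).toNat < n := by omega
      have hH := ih _ hlt (e / 2) rfl
      rw [hq]
      have hS : pvGoodM cs (pvMatMulB (pvMatPowB X (e / 2)) (pvMatPowB X (e / 2))) :=
        pv_goodM_mul _ _ _ hH hH.2.2
      by_cases h2 : PySem.Int.mod e 2 ≠ 0
      · rw [if_pos h2]; exact pv_goodM_mul _ _ _ hS hX.2.2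
      · rw [if_neg h2]; exact hS

theorem pv_matpow_step (cs : List PvCell) (hcs : cs.Nodup) (X : PvMat) (hX : pvGoodM cs X) :
    ∀ (n : Nat) (e : Int), e.toNat = n → 1 ≤ e →
      pvStepF cs (pvMVal (pvMatPowB X e)) = (pvStepF cs (pvMVal X))^[e.toNat] := by
  intro n
  induction n using Nat.strong_induction_on with
  | _ n ih =>
    intro e hn he
    rw [pvMatPowB]
    by_cases h1 : e ≤ 1
    · rw [dif_pos h1]
      have he1 : e = 1 := le_antisymm h1 he
      subst he1
      simp
    · rw [dif_neg h1]
      have hq : PySem.Int.floordiv e 2 = e / 2 :=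
        PySem.Int.floordiv_eq_ediv_of_pos (by norm_num)
      have hlt : (e / 2).toNat < n := by omega
      have hq1 : 1 ≤ e / 2 := by omega
      have hH : pvGoodM cs (pvMatPowB X (e / 2)) :=
        pv_matpow_good cs X hX _ (e / 2) rfl
      have hHs := ih _ hlt (e / 2) rfl hq1
      rw [hq]
      have hSs : pvStepF cs (pvMVal (pvMatMulB (pvMatPowB X (e / 2)) (pvMatPowB X (e / 2))))
          = (pvStepF cs (pvMVal X))^[(e / 2).toNat + (e / 2).toNat] := by
        rw [pv_step_mul cs hcs _ _ hH hH.2.2, hHs, ← Function.iterate_add]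
      have hmod : PySem.Int.mod e 2 = e % 2 :=
        PySem.Int.mod_eq_emod_of_pos (by norm_num)
      by_cases h2 : PySem.Int.mod e 2 ≠ 0
      · rw [if_pos h2]
        rw [hmod] at h2
        have hSg : pvGoodM cs (pvMatMulB (pvMatPowB X (e / 2)) (pvMatPowB X (e / 2))) :=
          pv_goodM_mul _ _ _ hH hH.2.2
        rw [pv_step_mul cs hcs _ _ hSg hX.2.2, hSs]
        have hiter : pvStepF cs (pvMVal X) ∘ (pvStepF cs (pvMVal X))^[(e / 2).toNat + (e / 2).toNat]
            = (pvStepF cs (pvMVal X))^[(e / 2).toNat + (e / 2).toNat + 1] := by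
          rw [Function.iterate_succ']
        rw [hiter]
        congr 1
        omega
      · rw [if_neg h2]
        rw [hmod] at h2
        rw [hSs]
        congr 1
        omega


-- ===== A's BFS, semantically: each layer is one pvAdj step =====

def pvLv (vis : List (List (List Int))) (i : Nat) : PvCell → PvZ :=
  fun u => ((pvGet3 vis u.1.toNat u.2.toNat i : Int) : PvZ)

def pvShape (N M D : Nat) (v : List (List (List Int))) : Prop :=
  v.length = N ∧ ∀ row ∈ v, row.length = M ∧ ∀ col ∈ row, col.length = D + 1 ∧
    ∀ x ∈ col, 0 ≤ x ∧ x < pvP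

theorem pv_getD_set_eq {α : Type} (l : List α) (n : Nat) (a d : α) (h : n < l.length) :
    (l.set n a).getD n d = a := by
  rw [List.getD_eq_getElem?_getD, List.getElem?_set_self (by simpa using h)]; rfl

theorem pv_getD_set_ne {α : Type} (l : List α) (n m : Nat) (a d : α) (h : n ≠ m) :
    (l.set n a).getD m d = l.getD m d := by
  rw [List.getD_eq_getElem?_getD, List.getElem?_set_ne h, ← List.getD_eq_getElem?_getD]

theorem pv_getD_mem_or {α : Type} (l : List α) (n : Nat) (d : α) :
    l.getD n d = d ∨ l.getD n d ∈ l := by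
  by_cases h : n < l.length
  · right
    rw [List.getD_eq_getElem _ _ h]
    exact List.getElem_mem h
  · left
    rw [List.getD_eq_getElem?_getD, List.getElem?_eq_none (by omega)]
    rfl

theorem pv_shape_rowlen (N M D : Nat) (v : List (List (List Int))) (hs : pvShape N M D v)
    (r : Nat) (hr : r < N) : (v.getD r []).length = M := by
  have hlt : r < v.length := by rw [hs.1]; exact hr
  have hmem : v.getD r [] ∈ v := by
    rw [List.getD_eq_getElem _ _ hlt]; exact List.getElem_mem hlt
  exact (hs.2 _ hmem).1

theorem pv_shape_collen (N M D : Nat) (v : List (List (List Int))) (hs : pvShape N M D v)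
    (r c : Nat) (hr : r < N) (hc : c < M) : ((v.getD r []).getD c []).length = D + 1 := by
  have hlt : r < v.length := by rw [hs.1]; exact hr
  have hmem : v.getD r [] ∈ v := by
    rw [List.getD_eq_getElem _ _ hlt]; exact List.getElem_mem hlt
  have hclt : c < (v.getD r []).length := by rw [pv_shape_rowlen N M D v hs r hr]; exact hc
  have hcmem : (v.getD r []).getD c [] ∈ v.getD r [] := by
    rw [List.getD_eq_getElem _ _ hclt]; exact List.getElem_mem hclt
  exact ((hs.2 _ hmem).2 _ hcmem).1

theorem pv_get3_range (N M D : Nat) (v : List (List (List Int))) (hs : pvShape N M D v)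
    (r c i : Nat) : 0 ≤ pvGet3 v r c i ∧ pvGet3 v r c i < pvP := by
  unfold pvGet3
  rcases pv_getD_mem_or v r [] with h | hmem
  · rw [h]; simp; norm_num [pvP]
  · rcases pv_getD_mem_or (v.getD r []) c [] with h | hmem2
    · rw [h]; simp; norm_num [pvP]
    · rcases pv_getD_mem_or ((v.getD r []).getD c []) i 0 with h | hmem3
      · rw [h]; norm_num [pvP]
      · exact ((hs.2 _ hmem).2 _ hmem2).2 _ hmem3

theorem pv_set3_shape (N M D : Nat) (v : List (List (List Int))) (hs : pvShape N M D v)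
    (r c i : Nat) (x : Int) (hr : r < N) (hc : c < M) (hx : 0 ≤ x ∧ x < pvP) :
    pvShape N M D (pvSet3 v r c i x) := by
  have hrlen : r < v.length := by rw [hs.1]; exact hr
  have hrowlen : (v.getD r []).length = M := pv_shape_rowlen N M D v hs r hr
  have hrowmem : v.getD r [] ∈ v := by
    rw [List.getD_eq_getElem _ _ hrlen]; exact List.getElem_mem hrlen
  have hclt : c < (v.getD r []).length := by rw [hrowlen]; exact hc
  have hcolmem : (v.getD r []).getD c [] ∈ v.getD r [] := by
    rw [List.getD_eq_getElem _ _ hclt]; exact List.getElem_mem hclt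
  have hcold := (hs.2 _ hrowmem).2 _ hcolmem
  constructor
  · show (v.set r _).length = N
    rw [List.length_set, hs.1]
  intro row hrow
  rcases List.mem_or_eq_of_mem_set hrow with hmem | rfl
  · exact hs.2 _ hmem
  · constructor
    · rw [List.length_set, hrowlen]
    intro col hcol
    rcases List.mem_or_eq_of_mem_set hcol with hmem2 | rfl
    · exact (hs.2 _ hrowmem).2 _ hmem2
    · constructor
      · rw [List.length_set, hcold.1]
      intro y hy
      rcases List.mem_or_eq_of_mem_set hy with hmem3 | rfl
      · exact hcold.2 _ hmem3
      · exact hx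

theorem pv_get3_set3 (N M D : Nat) (v : List (List (List Int))) (hs : pvShape N M D v)
    (r c i : Nat) (x : Int) (hr : r < N) (hc : c < M) (hi : i < D + 1) (r' c' i' : Nat) :
    pvGet3 (pvSet3 v r c i x) r' c' i'
      = if r' = r ∧ c' = c ∧ i' = i then x else pvGet3 v r' c' i' := by
  have hrlen : r < v.length := by rw [hs.1]; exact hr
  have hclen : c < (v.getD r []).length := by rw [pv_shape_rowlen N M D v hs r hr]; exact hc
  have hilen : i < ((v.getD r []).getD c []).length := by
    rw [pv_shape_collen N M D v hs r c hr hc]; exact hi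
  unfold pvGet3 pvSet3
  by_cases h1 : r' = r
  · subst h1
    rw [pv_getD_set_eq _ _ _ _ hrlen]
    by_cases h2 : c' = c
    · subst h2
      rw [pv_getD_set_eq _ _ _ _ hclen]
      by_cases h3 : i' = i
      · subst h3
        rw [pv_getD_set_eq _ _ _ _ hilen]
        simp
      · rw [pv_getD_set_ne _ _ _ _ _ (fun h => h3 h.symm)]
        simp [h3]
    · rw [pv_getD_set_ne _ _ _ _ _ (fun h => h2 h.symm)]
      simp [h2]
  · rw [pv_getD_set_ne _ _ _ _ _ (fun h => h1 h.symm)]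
    simp [h1]

-- the fresh 3D table and its one seeded cell
def pvInit (N M D cr cc : Nat) : List (List (List Int)) :=
  pvSet3 (List.replicate N (List.replicate M (List.replicate (D + 1) (0 : Int)))) cr cc 0 1

theorem pv_get3_rep (N M D : Nat) (r c i : Nat) :
    pvGet3 (List.replicate N (List.replicate M (List.replicate (D + 1) (0 : Int)))) r c i
      = 0 := by
  unfold pvGet3
  rcases pv_getD_mem_or (List.replicate N (List.replicate M (List.replicate (D + 1) (0 : Int)))) r [] with h | h
  · rw [h]; simp
  · rw [List.eq_of_mem_replicate h]
    rcases pv_getD_mem_or (List.replicate M (List.replicate (D + 1) (0 : Int))) c [] with h2 | h2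
    · rw [h2]; simp
    · rw [List.eq_of_mem_replicate h2]
      rcases pv_getD_mem_or (List.replicate (D + 1) (0 : Int)) i 0 with h3 | h3
      · rw [h3]
      · exact List.eq_of_mem_replicate h3

theorem pv_shape_rep (N M D : Nat) :
    pvShape N M D (List.replicate N (List.replicate M (List.replicate (D + 1) (0 : Int)))) := by
  refine ⟨by simp, ?_⟩
  intro row hrow
  rw [List.eq_of_mem_replicate hrow]
  refine ⟨by simp, ?_⟩
  intro col hcol
  rw [List.eq_of_mem_replicate hcol]
  refine ⟨by simp, ?_⟩
  intro x hx
  rw [List.eq_of_mem_replicate hx]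
  norm_num [pvP]

theorem pv_init_shape (N M D cr cc : Nat) (hcr : cr < N) (hcc : cc < M) :
    pvShape N M D (pvInit N M D cr cc) :=
  pv_set3_shape N M D _ (pv_shape_rep N M D) cr cc 0 1 hcr hcc (by norm_num [pvP])

theorem pv_init_get3 (N M D cr cc : Nat) (hcr : cr < N) (hcc : cc < M) (r c i : Nat) :
    pvGet3 (pvInit N M D cr cc) r c i = if r = cr ∧ c = cc ∧ i = 0 then 1 else 0 := by
  unfold pvInit
  rw [pv_get3_set3 N M D _ (pv_shape_rep N M D) cr cc 0 1 hcr hcc (by omega) r c i]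
  rw [pv_get3_rep]

-- the literal inner loops of pvBuildVisited, named
def pvDirStep (grid : List (List Int)) (d : List Int) (N M r c i : Nat) :
    List (List (List Int)) → Nat → List (List (List Int)) := fun vis j =>
  let nr : Int := (r : Int) + ([-1, 1, 0, 0].getD j 0)
  let nc : Int := (c : Int) + ([0, 0, -1, 1].getD j 0)
  if 0 ≤ nr ∧ nr < (N : Int) ∧ 0 ≤ nc ∧ nc < (M : Int) ∧
      (grid.getD nr.toNat []).getD nc.toNat 0 - (grid.getD r []).getD c 0 = d.getD i 0 then
    pvSet3 vis nr.toNat nc.toNat (i + 1)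
      (PySem.Int.mod (pvGet3 vis nr.toNat nc.toNat (i + 1) + pvGet3 vis r c i) pvP)
  else vis

def pvCellStep (grid : List (List Int)) (d : List Int) (N M i : Nat) :
    List (List (List Int)) → Nat × Nat → List (List (List Int)) := fun vis rc =>
  if pvGet3 vis rc.1 rc.2 i = 0 then vis
  else (List.range 4).foldl (pvDirStep grid d N M rc.1 rc.2 i) vis

def pvPairs (N M : Nat) : List (Nat × Nat) :=
  (List.range N).flatMap (fun r => (List.range M).map (fun c => (r, c)))

def pvCandN (r c j : Nat) : PvCell :=
  ((r : Int) + ([-1, 1, 0, 0].getD j 0), (c : Int) + ([0, 0, -1, 1].getD j 0))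

def pvInd (grid : List (List Int)) (N M : Nat) (h : Int) (r c j : Nat) (v : PvCell) : PvZ :=
  if v = pvCandN r c j ∧ pvOk grid N M h ((r : Int), (c : Int)) v then 1 else 0

theorem pv_foldl_flatten {α β γ : Type} (l1 : List β) (l2 : List γ) (f : α → β × γ → α)
    (a : α) :
    l1.foldl (fun acc x => l2.foldl (fun acc y => f acc (x, y)) acc) a
      = (l1.flatMap (fun x => l2.map (fun y => (x, y)))).foldl f a := by
  induction l1 generalizing a with
  | nil => rfl
  | cons x t ih =>
      simp only [List.foldl_cons, List.flatMap_cons, List.foldl_append, List.foldl_map]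
      rw [ih]

theorem pv_pairs_cells (N M : Nat) :
    pvCellsB N M = (pvPairs N M).map (fun rc => ((rc.1 : Int), (rc.2 : Int))) := by
  unfold pvCellsB pvPairs
  rw [List.map_flatMap]
  simp only [List.map_map]
  rfl

theorem pv_pairs_mem (N M : Nat) (p : Nat × Nat) (hp : p ∈ pvPairs N M) :
    p.1 < N ∧ p.2 < M := by
  unfold pvPairs at hp
  rw [List.mem_flatMap] at hp
  obtain ⟨r, hr, hmem⟩ := hp
  rw [List.mem_map] at hmem
  obtain ⟨c, hc, rfl⟩ := hmem
  exact ⟨List.mem_range.mp hr, List.mem_range.mp hc⟩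

theorem pv_build_eq (grid : List (List Int)) (d : List Int) (N M cr cc : Nat) :
    pvBuildVisited grid d N M cr cc
      = (List.range d.length).foldl
          (fun vis i => (pvPairs N M).foldl (pvCellStep grid d N M i) vis)
          (pvInit N M d.length cr cc) := by
  have h : ∀ (i : Nat) (vis : List (List (List Int))),
      (List.range N).foldl (fun vis r =>
        (List.range M).foldl (fun vis c => pvCellStep grid d N M i vis (r, c)) vis) vis
      = (pvPairs N M).foldl (pvCellStep grid d N M i) vis := by
    intro i vis
    exact pv_foldl_flatten (List.range N) (List.range M) (pvCellStep grid d N M i) vis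
  show (List.range d.length).foldl
      (fun vis i => (List.range N).foldl (fun vis r =>
        (List.range M).foldl (fun vis c => pvCellStep grid d N M i vis (r, c)) vis) vis)
      (pvInit N M d.length cr cc) = _
  simp only [h]

-- a sum of pairwise-exclusive indicators over a nodup list
theorem pv_ind_list (v : PvCell) (P : Prop) [Decidable P] :
    ∀ (L : List PvCell), L.Nodup →
      (L.map (fun w => if v = w ∧ P then (1 : PvZ) else 0)).sum
        = if v ∈ L ∧ P then 1 else 0 := by
  intro L
  induction L with
  | nil => intro _; simp
  | cons w t ih =>
      intro hnd
      rw [List.nodup_cons] at hnd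
      simp only [List.map_cons, List.sum_cons]
      rw [ih hnd.2]
      by_cases h1 : v = w ∧ P
      · rw [if_pos h1]
        have hvt : ¬ (v ∈ t ∧ P) := fun hh => hnd.1 (h1.1 ▸ hh.1)
        rw [if_neg hvt, if_pos ⟨List.mem_cons.mpr (Or.inl h1.1), h1.2⟩]
        norm_num
      · rw [if_neg h1]
        by_cases h2 : v ∈ t ∧ P
        · rw [if_pos h2, if_pos ⟨List.mem_cons_of_mem _ h2.1, h2.2⟩]
          norm_num
        · rw [if_neg h2, if_neg ?_]
          · norm_num
          · rintro ⟨hm, hP⟩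
            rcases List.mem_cons.mp hm with rfl | hm2
            · exact h1 ⟨rfl, hP⟩
            · exact h2 ⟨hm2, hP⟩

theorem pv_cands_map (r c : Nat) :
    (List.range 4).map (pvCandN r c) = pvCands ((r : Int), (c : Int)) := by
  show [((r : Int) + -1, (c : Int) + 0), ((r : Int) + 1, (c : Int) + 0),
      ((r : Int) + 0, (c : Int) + -1), ((r : Int) + 0, (c : Int) + 1)]
    = [((r : Int) - 1, (c : Int)), ((r : Int) + 1, (c : Int)),
      ((r : Int), (c : Int) - 1), ((r : Int), (c : Int) + 1)]
  norm_num [Prod.ext_iff]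
  omega

theorem pv_cands_nodup (r c : Nat) : (pvCands ((r : Int), (c : Int))).Nodup := by
  unfold pvCands
  refine List.nodup_cons.mpr ⟨?_, List.nodup_cons.mpr ⟨?_,
    List.nodup_cons.mpr ⟨?_, List.nodup_singleton _⟩⟩⟩ <;>
    simp only [List.mem_cons, List.not_mem_nil, or_false, Prod.mk.injEq, not_or] <;>
    omega

theorem pv_ind_sum (grid : List (List Int)) (N M : Nat) (h : Int) (r c : Nat) (v : PvCell) :
    ((List.range 4).map (fun j => pvInd grid N M h r c j v)).sum
      = pvAdj grid N M h ((r : Int), (c : Int)) v := by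
  unfold pvInd pvAdj
  rw [show (fun j => if v = pvCandN r c j ∧ pvOk grid N M h ((r : Int), (c : Int)) v
        then (1 : PvZ) else 0)
      = ((fun w => if v = w ∧ pvOk grid N M h ((r : Int), (c : Int)) v then (1 : PvZ) else 0)
          ∘ pvCandN r c) from rfl]
  rw [← List.map_map, pv_cands_map]
  exact pv_ind_list v _ _ (pv_cands_nodup r c)


theorem pv_dirfold (grid : List (List Int)) (d : List Int) (N M r c i : Nat)
    (hr : r < N) (hc : c < M) (hi : i < d.length) :
    ∀ (js : List Nat) (vis : List (List (List Int))), pvShape N M d.length vis →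
      pvShape N M d.length (js.foldl (pvDirStep grid d N M r c i) vis) ∧
      (∀ r' c' i', i' ≠ i + 1 →
        pvGet3 (js.foldl (pvDirStep grid d N M r c i) vis) r' c' i' = pvGet3 vis r' c' i') ∧
      (∀ v ∈ pvCellsB N M,
        pvLv (js.foldl (pvDirStep grid d N M r c i) vis) (i + 1) v
          = pvLv vis (i + 1) v + pvLv vis i ((r : Int), (c : Int))
              * (js.map (fun j => pvInd grid N M (d.getD i 0) r c j v)).sum) := by
  intro js
  induction js with
  | nil =>
      intro vis hs
      refine ⟨hs, fun _ _ _ _ => rfl, ?_⟩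
      intro v _
      simp
  | cons j t ih =>
      intro vis hs
      simp only [List.foldl_cons, List.map_cons, List.sum_cons]
      have hstep : pvShape N M d.length (pvDirStep grid d N M r c i vis j) ∧
          (∀ r' c' i', i' ≠ i + 1 →
            pvGet3 (pvDirStep grid d N M r c i vis j) r' c' i' = pvGet3 vis r' c' i') ∧
          (∀ v ∈ pvCellsB N M,
            pvLv (pvDirStep grid d N M r c i vis j) (i + 1) v
              = pvLv vis (i + 1) v + pvLv vis i ((r : Int), (c : Int))
                  * pvInd grid N M (d.getD i 0) r c j v) := by
        unfold pvDirStep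
        by_cases hcnd : 0 ≤ (r : Int) + ([-1, 1, 0, 0].getD j 0) ∧
            (r : Int) + ([-1, 1, 0, 0].getD j 0) < (N : Int) ∧
            0 ≤ (c : Int) + ([0, 0, -1, 1].getD j 0) ∧
            (c : Int) + ([0, 0, -1, 1].getD j 0) < (M : Int) ∧
            (grid.getD ((r : Int) + ([-1, 1, 0, 0].getD j 0)).toNat []).getD
                ((c : Int) + ([0, 0, -1, 1].getD j 0)).toNat 0
              - (grid.getD r []).getD c 0 = d.getD i 0
        · rw [if_pos hcnd]
          obtain ⟨hb1, hb2, hb3, hb4, hb5⟩ := hcnd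
          set nr : Int := (r : Int) + ([-1, 1, 0, 0].getD j 0) with hnr
          set nc : Int := (c : Int) + ([0, 0, -1, 1].getD j 0) with hnc
          have hnrN : nr.toNat < N := by omega
          have hncM : nc.toNat < M := by omega
          have hmr : 0 ≤ PySem.Int.mod (pvGet3 vis nr.toNat nc.toNat (i + 1) + pvGet3 vis r c i) pvP
              ∧ PySem.Int.mod (pvGet3 vis nr.toNat nc.toNat (i + 1) + pvGet3 vis r c i) pvP < pvP :=
            ⟨PySem.Int.mod_nonneg _ (by norm_num [pvP]), PySem.Int.mod_lt _ (by norm_num [pvP])⟩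
          refine ⟨pv_set3_shape N M d.length vis hs _ _ _ _ hnrN hncM hmr, ?_, ?_⟩
          · intro r' c' i' hne
            rw [pv_get3_set3 N M d.length vis hs _ _ _ _ hnrN hncM (by omega) r' c' i']
            rw [if_neg (fun hh => hne hh.2.2)]
          · intro v hv
            obtain ⟨rv, hrv, cv, hcv, rfl⟩ := (pv_mem_cells N M v).mp hv
            unfold pvLv
            simp only [Int.toNat_natCast]
            rw [pv_get3_set3 N M d.length vis hs _ _ _ _ hnrN hncM (by omega) rv cv (i + 1)]
            by_cases hveq : rv = nr.toNat ∧ cv = nc.toNat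
            · rw [if_pos ⟨hveq.1, hveq.2, rfl⟩]
              have hcand : ((rv : Int), (cv : Int)) = pvCandN r c j := by
                unfold pvCandN
                rw [← hnr, ← hnc]
                have h1 : (rv : Int) = nr := by omega
                have h2 : (cv : Int) = nc := by omega
                rw [h1, h2]
              have hok : pvOk grid N M (d.getD i 0) ((r : Int), (c : Int))
                  ((rv : Int), (cv : Int)) := by
                refine ⟨?_, ?_, ?_, ?_, ?_⟩
                · show (0 : Int) ≤ (rv : Int); omega
                · show (rv : Int) < (N : Int); omega
                · show (0 : Int) ≤ (cv : Int); omega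
                · show (cv : Int) < (M : Int); omega
                · simp only [Int.toNat_natCast]
                  rw [hveq.1, hveq.2]
                  exact hb5
              have hind : pvInd grid N M (d.getD i 0) r c j ((rv : Int), (cv : Int)) = 1 := by
                unfold pvInd
                rw [if_pos ⟨hcand, hok⟩]
              rw [hind, mul_one, pv_cast_mod]
              rw [hveq.1, hveq.2]
              push_cast
              ring
            · rw [if_neg (fun hh => hveq ⟨hh.1, hh.2.1⟩)]
              have hind : pvInd grid N M (d.getD i 0) r c j ((rv : Int), (cv : Int)) = 0 := by
                unfold pvInd
                rw [if_neg]
                rintro ⟨hcand, _⟩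
                apply hveq
                unfold pvCandN at hcand
                rw [← hnr, ← hnc] at hcand
                have h1 : (rv : Int) = nr := congrArg Prod.fst hcand
                have h2 : (cv : Int) = nc := congrArg Prod.snd hcand
                constructor <;> omega
              rw [hind, mul_zero, add_zero]
        · rw [if_neg hcnd]
          refine ⟨hs, fun _ _ _ _ => rfl, ?_⟩
          intro v hv
          have hind : pvInd grid N M (d.getD i 0) r c j v = 0 := by
            unfold pvInd
            rw [if_neg]
            rintro ⟨hcand, hok⟩
            apply hcnd
            obtain ⟨ho1, ho2, ho3, ho4, ho5⟩ := hok
            have h1 : v.1 = (r : Int) + [-1, 1, 0, 0].getD j 0 := by rw [hcand]; rfl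
            have h2 : v.2 = (c : Int) + [0, 0, -1, 1].getD j 0 := by rw [hcand]; rfl
            rw [h1] at ho1 ho2
            rw [h2] at ho3 ho4
            rw [h1, h2] at ho5
            simp only [Int.toNat_natCast] at ho5
            exact ⟨ho1, ho2, ho3, ho4, ho5⟩
          rw [hind, mul_zero, add_zero]
      obtain ⟨hs1, hunt1, hval1⟩ := hstep
      obtain ⟨hs2, hunt2, hval2⟩ := ih (pvDirStep grid d N M r c i vis j) hs1
      refine ⟨hs2, ?_, ?_⟩
      · intro r' c' i' hne
        rw [hunt2 _ _ _ hne, hunt1 _ _ _ hne]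
      · intro v hv
        rw [hval2 v hv, hval1 v hv]
        have hLi : pvLv (pvDirStep grid d N M r c i vis j) i ((r : Int), (c : Int))
            = pvLv vis i ((r : Int), (c : Int)) := by
          unfold pvLv
          rw [hunt1 _ _ _ (by omega)]
        rw [hLi]
        ring

theorem pv_cellpass (grid : List (List Int)) (d : List Int) (N M i : Nat)
    (hi : i < d.length) :
    ∀ (cl : List (Nat × Nat)), (∀ p ∈ cl, p.1 < N ∧ p.2 < M) →
      ∀ vis, pvShape N M d.length vis →
      pvShape N M d.length (cl.foldl (pvCellStep grid d N M i) vis) ∧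
      (∀ r' c' i', i' ≠ i + 1 →
        pvGet3 (cl.foldl (pvCellStep grid d N M i) vis) r' c' i' = pvGet3 vis r' c' i') ∧
      (∀ v ∈ pvCellsB N M,
        pvLv (cl.foldl (pvCellStep grid d N M i) vis) (i + 1) v
          = pvLv vis (i + 1) v
            + (cl.map (fun rc => pvLv vis i ((rc.1 : Int), (rc.2 : Int))
                * pvAdj grid N M (d.getD i 0) ((rc.1 : Int), (rc.2 : Int)) v)).sum) := by
  intro cl
  induction cl with
  | nil =>
      intro _ vis hs
      refine ⟨hs, fun _ _ _ _ => rfl, ?_⟩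
      intro v _
      simp
  | cons rc t ih =>
      intro hmem vis hs
      have hrc := hmem rc (List.mem_cons_self)
      have hmemt : ∀ p ∈ t, p.1 < N ∧ p.2 < M := fun p hp => hmem p (List.mem_cons_of_mem _ hp)
      simp only [List.foldl_cons, List.map_cons, List.sum_cons]
      by_cases hz : pvGet3 vis rc.1 rc.2 i = 0
      · have hbody : pvCellStep grid d N M i vis rc = vis := by
          unfold pvCellStep
          rw [if_pos hz]
        rw [hbody]
        obtain ⟨hs2, hunt2, hval2⟩ := ih hmemt vis hs
        refine ⟨hs2, hunt2, ?_⟩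
        intro v hv
        rw [hval2 v hv]
        have hzero : pvLv vis i ((rc.1 : Int), (rc.2 : Int)) = 0 := by
          unfold pvLv
          simp only [Int.toNat_natCast]
          rw [hz]
          simp
        rw [hzero, zero_mul, zero_add]
      · have hbody : pvCellStep grid d N M i vis rc
            = (List.range 4).foldl (pvDirStep grid d N M rc.1 rc.2 i) vis := by
          unfold pvCellStep
          rw [if_neg hz]
        rw [hbody]
        obtain ⟨hs1, hunt1, hval1⟩ :=
          pv_dirfold grid d N M rc.1 rc.2 i hrc.1 hrc.2 hi (List.range 4) vis hs
        obtain ⟨hs2, hunt2, hval2⟩ :=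
          ih hmemt ((List.range 4).foldl (pvDirStep grid d N M rc.1 rc.2 i) vis) hs1
        refine ⟨hs2, ?_, ?_⟩
        · intro r' c' i' hne
          rw [hunt2 _ _ _ hne, hunt1 _ _ _ hne]
        · intro v hv
          rw [hval2 v hv, hval1 v hv, pv_ind_sum]
          have hmap : (t.map (fun rc' =>
              pvLv ((List.range 4).foldl (pvDirStep grid d N M rc.1 rc.2 i) vis) i
                  ((rc'.1 : Int), (rc'.2 : Int))
                * pvAdj grid N M (d.getD i 0) ((rc'.1 : Int), (rc'.2 : Int)) v))
              = t.map (fun rc' => pvLv vis i ((rc'.1 : Int), (rc'.2 : Int))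
                * pvAdj grid N M (d.getD i 0) ((rc'.1 : Int), (rc'.2 : Int)) v) := by
            apply List.map_congr_left
            intro rc' _
            have : pvLv ((List.range 4).foldl (pvDirStep grid d N M rc.1 rc.2 i) vis) i
                ((rc'.1 : Int), (rc'.2 : Int))
                = pvLv vis i ((rc'.1 : Int), (rc'.2 : Int)) := by
              unfold pvLv
              rw [hunt1 _ _ _ (by omega)]
            rw [this]
          rw [hmap]
          ring

theorem pv_iter_snoc (cs : List PvCell) (grid : List (List Int)) (N M : Nat)
    (d : List Int) (i : Nat) (hi : i < d.length) (g : PvCell → PvZ) :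
    pvIter cs grid N M (d.take (i + 1)) g
      = pvVMul cs (pvIter cs grid N M (d.take i) g) (pvAdj grid N M (d.getD i 0)) := by
  unfold pvIter
  have htake : d.take (i + 1) = d.take i ++ [d.getD i 0] := by
    rw [List.take_succ, List.getElem?_eq_getElem hi, List.getD_eq_getElem _ _ hi]
    rfl
  rw [htake, List.foldl_append]
  simp

theorem pv_layers (grid : List (List Int)) (d : List Int) (N M cr cc : Nat)
    (hcr : cr < N) (hcc : cc < M) :
    ∀ i, i ≤ d.length →
      pvShape N M d.length ((List.range i).foldl
        (fun vis i' => (pvPairs N M).foldl (pvCellStep grid d N M i') vis)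
        (pvInit N M d.length cr cc)) ∧
      (∀ v ∈ pvCellsB N M,
        pvLv ((List.range i).foldl
          (fun vis i' => (pvPairs N M).foldl (pvCellStep grid d N M i') vis)
          (pvInit N M d.length cr cc)) i v
          = pvIter (pvCellsB N M) grid N M (d.take i) (pvE ((cr : Int), (cc : Int))) v) ∧
      (∀ j, i < j → ∀ v ∈ pvCellsB N M,
        pvLv ((List.range i).foldl
          (fun vis i' => (pvPairs N M).foldl (pvCellStep grid d N M i') vis)
          (pvInit N M d.length cr cc)) j v = 0) := by
  intro i
  induction i with
  | zero =>
      intro _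
      simp only [List.range_zero, List.foldl_nil]
      refine ⟨pv_init_shape N M d.length cr cc hcr hcc, ?_, ?_⟩
      · intro v hv
        obtain ⟨rv, hrv, cv, hcv, rfl⟩ := (pv_mem_cells N M v).mp hv
        unfold pvLv pvIter pvE
        simp only [Int.toNat_natCast, List.take_zero, List.foldl_nil]
        rw [pv_init_get3 N M d.length cr cc hcr hcc rv cv 0]
        by_cases hh : rv = cr ∧ cv = cc
        · rw [if_pos ⟨hh.1, hh.2, rfl⟩, if_pos (by rw [hh.1, hh.2])]
          simp
        · rw [if_neg (fun hq => hh ⟨hq.1, hq.2.1⟩), if_neg]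
          · simp
          · intro hq
            apply hh
            have h1 := congrArg Prod.fst hq
            have h2 := congrArg Prod.snd hq
            simp at h1 h2
            exact ⟨h1, h2⟩
      · intro j hj v hv
        obtain ⟨rv, hrv, cv, hcv, rfl⟩ := (pv_mem_cells N M v).mp hv
        unfold pvLv
        simp only [Int.toNat_natCast]
        rw [pv_init_get3 N M d.length cr cc hcr hcc rv cv j]
        rw [if_neg (fun hq => by omega)]
        simp
  | succ i ih =>
      intro hle
      have hi : i < d.length := by omega
      obtain ⟨hs0, hval0, hzero0⟩ := ih (by omega)
      rw [List.range_succ, List.foldl_append, List.foldl_cons, List.foldl_nil]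
      obtain ⟨hs1, hunt1, hval1⟩ := pv_cellpass grid d N M i hi (pvPairs N M)
        (fun p hp => pv_pairs_mem N M p hp) _ hs0
      refine ⟨hs1, ?_, ?_⟩
      · intro v hv
        rw [hval1 v hv]
        rw [hzero0 (i + 1) (by omega) v hv, zero_add]
        have hsum : ((pvPairs N M).map (fun rc =>
            pvLv ((List.range i).foldl
              (fun vis i' => (pvPairs N M).foldl (pvCellStep grid d N M i') vis)
              (pvInit N M d.length cr cc)) i ((rc.1 : Int), (rc.2 : Int))
              * pvAdj grid N M (d.getD i 0) ((rc.1 : Int), (rc.2 : Int)) v)).sum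
            = pvVMul (pvCellsB N M)
                (pvIter (pvCellsB N M) grid N M (d.take i) (pvE ((cr : Int), (cc : Int))))
                (pvAdj grid N M (d.getD i 0)) v := by
          unfold pvVMul
          rw [pv_pairs_cells N M, List.map_map]
          apply congrArg
          apply List.map_congr_left
          intro rc hrc
          have hmem : ((rc.1 : Int), (rc.2 : Int)) ∈ pvCellsB N M := by
            rw [pv_pairs_cells N M]
            exact List.mem_map.mpr ⟨rc, hrc, rfl⟩
          simp only [Function.comp_apply]
          rw [hval0 _ hmem, ← pv_pairs_cells N M]
        rw [hsum, ← pv_iter_snoc (pvCellsB N M) grid N M d i hi]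
      · intro j hj v hv
        have : pvLv ((pvPairs N M).foldl (pvCellStep grid d N M i)
            ((List.range i).foldl
              (fun vis i' => (pvPairs N M).foldl (pvCellStep grid d N M i') vis)
              (pvInit N M d.length cr cc))) j v
            = pvLv ((List.range i).foldl
              (fun vis i' => (pvPairs N M).foldl (pvCellStep grid d N M i') vis)
              (pvInit N M d.length cr cc)) j v := by
          unfold pvLv
          rw [hunt1 _ _ _ (by omega)]
        rw [this, hzero0 j (by omega) v hv]

theorem pv_build_final (grid : List (List Int)) (d : List Int) (N M cr cc : Nat)
    (hcr : cr < N) (hcc : cc < M) :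
    pvShape N M d.length (pvBuildVisited grid d N M cr cc) ∧
    ∀ v ∈ pvCellsB N M,
      pvLv (pvBuildVisited grid d N M cr cc) d.length v
        = pvIter (pvCellsB N M) grid N M d (pvE ((cr : Int), (cc : Int))) v := by
  rw [pv_build_eq]
  obtain ⟨h1, h2, _⟩ := pv_layers grid d N M cr cc hcr hcc d.length le_rfl
  refine ⟨h1, ?_⟩
  intro v hv
  rw [h2 v hv, List.take_length]


-- ===== path_dict rows and both starts dicts, semantically =====

theorem pv_flip_if (A : PvCell → Prop) [DecidablePred A] (f : PvCell → Int) :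
    (fun (row : PvVec) (u : PvCell) => if A u then row else row.insert u (f u))
      = (fun (row : PvVec) (u : PvCell) => if ¬ A u then row.insert u (f u) else row) := by
  funext row u
  by_cases h : A u <;> simp [h]

theorem pv_pathrow_eq (vis : List (List (List Int))) (N M D : Nat) :
    pvPathRow vis N M D = (pvCellsB N M).foldl
      (fun row u => if pvGet3 vis u.1.toNat u.2.toNat D = 0 then row
        else row.insert u (pvGet3 vis u.1.toNat u.2.toNat D)) PySem.Dict.empty := by
  rw [pv_pairs_cells N M, List.foldl_map]
  unfold pvPathRow pvPairs
  exact pv_foldl_flatten (List.range N) (List.range M)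
    (fun row rc => if pvGet3 vis rc.1 rc.2 D = 0 then row
      else row.insert ((rc.1 : Int), (rc.2 : Int)) (pvGet3 vis rc.1 rc.2 D))
    PySem.Dict.empty

theorem pv_pathrow_val (vis : List (List (List Int))) (N M D : Nat) (v : PvCell) :
    pvVal (pvPathRow vis N M D) v
      = if v ∈ pvCellsB N M ∧ ¬ pvGet3 vis v.1.toNat v.2.toNat D = 0
        then ((pvGet3 vis v.1.toNat v.2.toNat D : Int) : PvZ) else 0 := by
  rw [pv_pathrow_eq,
    pv_flip_if (fun u => pvGet3 vis u.1.toNat u.2.toNat D = 0)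
      (fun u => pvGet3 vis u.1.toNat u.2.toNat D),
    pv_cif_val (fun u => ¬ pvGet3 vis u.1.toNat u.2.toNat D = 0)
      (fun u => pvGet3 vis u.1.toNat u.2.toNat D) (pvCellsB N M) PySem.Dict.empty v]
  by_cases h : v ∈ pvCellsB N M ∧ ¬ pvGet3 vis v.1.toNat v.2.toNat D = 0
  · rw [if_pos h, if_pos h]
  · rw [if_neg h, if_neg h]
    exact pv_val_empty v

theorem pv_pathrow_nodup (vis : List (List (List Int))) (N M D : Nat) :
    (pvPathRow vis N M D).keys.Nodup := by
  rw [pv_pathrow_eq,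
    pv_flip_if (fun u => pvGet3 vis u.1.toNat u.2.toNat D = 0)
      (fun u => pvGet3 vis u.1.toNat u.2.toNat D)]
  exact pv_cif_nodup _ _ _ _ (by simp [PySem.Dict.keys_empty])

theorem pv_pathrow_good (vis : List (List (List Int))) (N M D : Nat) :
    pvGood (pvCellsB N M) (pvPathRow vis N M D) := by
  rw [pv_pathrow_eq,
    pv_flip_if (fun u => pvGet3 vis u.1.toNat u.2.toNat D = 0)
      (fun u => pvGet3 vis u.1.toNat u.2.toNat D)]
  exact pv_cif_good _ _ _ _ (fun w hw _ => hw) _ (pv_good_empty _)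

theorem pv_pathrow_vals (vis : List (List (List Int))) (N M D : Nat)
    (hs : pvShape N M D vis) :
    ∀ p ∈ (pvPathRow vis N M D).items, p.2 ≠ 0 ∧ 0 ≤ p.2 ∧ p.2 < pvP := by
  intro p hp
  rw [pv_pathrow_eq,
    pv_flip_if (fun u => pvGet3 vis u.1.toNat u.2.toNat D = 0)
      (fun u => pvGet3 vis u.1.toNat u.2.toNat D)] at hp
  rcases pv_cif_items _ _ _ _ p hp with hmem | ⟨_, hc, hv⟩
  · simp [pv_items_emptyV] at hmem
  · have hr := pv_get3_range N M D vis hs p.1.1.toNat p.1.2.toNat D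
    exact ⟨by rw [hv]; exact hc, by rw [hv]; exact hr.1, by rw [hv]; exact hr.2⟩

def pvRowFn (grid : List (List Int)) (d : List Int) (u : PvCell) : PvVec :=
  pvPathRow (pvBuildVisited grid d grid.length (grid.headD []).length u.1.toNat u.2.toNat)
    grid.length (grid.headD []).length d.length

theorem pv_pd_eq (grid : List (List Int)) (d : List Int) :
    pvBuildPathDict grid d = (pvCellsB grid.length (grid.headD []).length).foldl
      (fun m u => m.insert u (pvRowFn grid d u)) PySem.Dict.empty := by
  rw [pv_pairs_cells, List.foldl_map]
  unfold pvBuildPathDict pvPairs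
  exact pv_foldl_flatten (List.range grid.length) (List.range (grid.headD []).length)
    (fun m rc => m.insert ((rc.1 : Int), (rc.2 : Int))
      (pvPathRow (pvBuildVisited grid d grid.length (grid.headD []).length rc.1 rc.2)
        grid.length (grid.headD []).length d.length))
    PySem.Dict.empty

theorem pv_pd_getD (grid : List (List Int)) (d : List Int) (u : PvCell) :
    (pvBuildPathDict grid d).getD u PySem.Dict.empty
      = if u ∈ pvCellsB grid.length (grid.headD []).length then pvRowFn grid d u
        else PySem.Dict.empty := by
  rw [pv_pd_eq]
  exact pv_fresh_getD _ _ (pv_cells_nodup _ _) u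

theorem pv_pd_keys (grid : List (List Int)) (d : List Int) :
    (pvBuildPathDict grid d).keys = pvCellsB grid.length (grid.headD []).length := by
  rw [pv_pd_eq]
  exact pv_fresh_keys _ _ (pv_cells_nodup _ _)

theorem pv_pd_items (grid : List (List Int)) (d : List Int) :
    (pvBuildPathDict grid d).items
      = (pvCellsB grid.length (grid.headD []).length).map (fun u => (u, pvRowFn grid d u)) := by
  rw [pv_pd_eq]
  exact pv_fresh_items _ _ (pv_cells_nodup _ _)

theorem pv_pd_goodM (grid : List (List Int)) (d : List Int) :
    pvGoodM (pvCellsB grid.length (grid.headD []).length) (pvBuildPathDict grid d) := by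
  refine ⟨?_, ?_, ?_⟩
  · rw [pv_pd_keys]; exact pv_cells_nodup _ _
  · rw [pv_pd_keys]; exact fun c hc => hc
  · intro i
    rw [pv_pd_getD]
    split_ifs
    · exact pv_pathrow_good _ _ _ _
    · exact pv_good_empty _

-- zero off the grid
theorem pv_adj_outside (grid : List (List Int)) (N M : Nat) (h : Int) (i j : PvCell)
    (hj : j ∉ pvCellsB N M) : pvAdj grid N M h i j = 0 := by
  unfold pvAdj
  rw [if_neg]
  rintro ⟨_, hok⟩
  exact hj (pv_ok_mem grid N M h i j hok)

theorem pv_vmul_outside (grid : List (List Int)) (N M : Nat) (h : Int) (g : PvCell → PvZ)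
    (j : PvCell) (hj : j ∉ pvCellsB N M) :
    pvVMul (pvCellsB N M) g (pvAdj grid N M h) j = 0 := by
  unfold pvVMul
  have : (pvCellsB N M).map (fun i => g i * pvAdj grid N M h i j)
      = (pvCellsB N M).map (fun _ => (0 : PvZ)) := by
    apply List.map_congr_left
    intro i _
    rw [pv_adj_outside grid N M h i j hj, mul_zero]
  rw [this]
  simp

theorem pv_iter_outside (grid : List (List Int)) (N M : Nat) :
    ∀ (hs : List Int) (g : PvCell → PvZ), (∀ j, j ∉ pvCellsB N M → g j = 0) →
      ∀ j, j ∉ pvCellsB N M → pvIter (pvCellsB N M) grid N M hs g j = 0 := by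
  intro hs
  induction hs with
  | nil => intro g hg j hj; exact hg j hj
  | cons h t ih =>
      intro g hg j hj
      exact ih _ (fun j' hj' => pv_vmul_outside grid N M h g j' hj') j hj

-- a dict has a nonzero entry iff its pvVal is somewhere nonzero
theorem pv_cast_ne (x : Int) (h0 : 0 ≤ x) (hp : x < pvP) (hx : x ≠ 0) :
    ((x : Int) : PvZ) ≠ 0 := by
  intro h
  have hd : ((1000000007 : Nat) : Int) ∣ x := (ZMod.intCast_zmod_eq_zero_iff_dvd x _).mp h
  have := Int.le_of_dvd (by omega) hd
  norm_num [pvP] at hp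
  omega

theorem pv_val_of_items_nil (w : PvVec) (h : w.items = []) : ∀ j, pvVal w j = 0 := by
  intro j
  have hw : w = PySem.Dict.empty := PySem.Dict.ext (by rw [h]; rfl)
  rw [hw]
  exact pv_val_empty j

theorem pv_itemsne_iff (w : PvVec) (hnd : w.keys.Nodup)
    (hvals : ∀ p ∈ w.items, p.2 ≠ 0 ∧ 0 ≤ p.2 ∧ p.2 < pvP) :
    w.items ≠ [] ↔ ∃ j, pvVal w j ≠ 0 := by
  constructor
  · intro hne
    obtain ⟨p, hp⟩ := List.exists_mem_of_ne_nil _ hne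
    obtain ⟨h1, h2, h3⟩ := hvals p hp
    refine ⟨p.1, ?_⟩
    have hgd : w.getD p.1 0 = p.2 := PySem.Dict.getD_of_mem_items w (by exact hp) hnd 0
    unfold pvVal
    rw [hgd]
    exact pv_cast_ne p.2 h2 h3 h1
  · rintro ⟨j, hj⟩ hnil
    exact hj (pv_val_of_items_nil w hnil j)

theorem pv_any_iff (w : PvVec) (hnd : w.keys.Nodup)
    (hvals : ∀ p ∈ w.items, 0 ≤ p.2 ∧ p.2 < pvP) :
    (w.values.any (fun x => decide (x ≠ 0)) = true) ↔ ∃ j, pvVal w j ≠ 0 := by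
  rw [List.any_eq_true]
  constructor
  · rintro ⟨x, hx, hxd⟩
    have hx0 : x ≠ 0 := of_decide_eq_true hxd
    have hxi : ∃ p ∈ w.items, p.2 = x := by
      have : w.values = w.items.map Prod.snd := rfl
      rw [this] at hx
      obtain ⟨p, hp, hpx⟩ := List.mem_map.mp hx
      exact ⟨p, hp, hpx⟩
    obtain ⟨p, hp, rfl⟩ := hxi
    obtain ⟨h2, h3⟩ := hvals p hp
    refine ⟨p.1, ?_⟩
    have hgd : w.getD p.1 0 = p.2 := PySem.Dict.getD_of_mem_items w (by exact hp) hnd 0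
    unfold pvVal
    rw [hgd]
    exact pv_cast_ne p.2 h2 h3 hx0
  · rintro ⟨j, hj⟩
    have hgd : w.getD j 0 ≠ 0 := by
      intro h
      apply hj
      unfold pvVal
      rw [h]
      simp
    have hsome : ∃ x, w.get? j = some x ∧ x ≠ 0 := by
      cases hq : w.get? j with
      | none =>
          exfalso
          apply hgd
          rw [PySem.Dict.getD_eq_get?_getD, hq]
          rfl
      | some x =>
          refine ⟨x, rfl, ?_⟩
          intro hx0
          apply hgd
          rw [PySem.Dict.getD_eq_get?_getD, hq, hx0]
          rfl
    obtain ⟨x, hq, hx0⟩ := hsome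
    have hmem := PySem.Dict.mem_items_of_get?_eq_some w hq
    refine ⟨x, ?_, by simp [hx0]⟩
    have : w.values = w.items.map Prod.snd := rfl
    rw [this]
    exact List.mem_map.mpr ⟨(j, x), hmem, rfl⟩


theorem pv_foldl_fun_congr {α β : Type} (f g : α → β → α) (h : ∀ a b, f a b = g a b) :
    ∀ (l : List β) (a0 : α), l.foldl f a0 = l.foldl g a0 := by
  intro l
  induction l with
  | nil => intro a0; rfl
  | cons x t ih => intro a0; simp only [List.foldl_cons, h]; exact ih _

theorem pv_Tfold_keys (grid : List (List Int)) (N M : Nat) :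
    ∀ (hs : List Int) (T0 : PvMat), T0.keys.Nodup →
      (hs.foldl (fun T h => pvMatMulB T (pvStepMatB grid N M h)) T0).keys = T0.keys := by
  intro hs
  induction hs with
  | nil => intro T0 _; rfl
  | cons h t ih =>
      intro T0 hnd
      simp only [List.foldl_cons]
      rw [ih _ (by rw [pv_mul_keys _ _ hnd]; exact hnd), pv_mul_keys _ _ hnd]

theorem pv_sum_ones : ∀ (l : List (PvCell × Int)), (l.map (fun _ => (1 : PvZ))).sum
    = (l.length : PvZ) := by
  intro l
  induction l with
  | nil => simp
  | cons x t ih => simp only [List.map_cons, List.sum_cons, List.length_cons, ih]; push_cast; ring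

-- ===== VERDICT (by name: the statement is the Claim_ definition above) =====
theorem solution_spec : Claim_equal_solution := by
  intro grid d k _hdom hpre
  obtain ⟨_hne, hk0le, _hrag⟩ := hpre
  unfold Spec_solution
  simp only [solution, solution_alt]
  set N := grid.length with hN
  set M := (grid.headD []).length with hM
  set cs := pvCellsB N M with hcs
  have hcsnd : cs.Nodup := pv_cells_nodup N M
  set pd := pvBuildPathDict grid d with hpd
  set T := d.foldl (fun T h => pvMatMulB T (pvStepMatB grid N M h)) (pvIdentB cs) with hT
  have hRF : ∀ (r c : Nat), pvRowFn grid d ((r : Int), (c : Int))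
      = pvPathRow (pvBuildVisited grid d N M r c) N M d.length := fun _ _ => rfl
  -- path_dict facts
  have hpdG : pvGoodM cs pd := pv_pd_goodM grid d
  have hcopy : pvCopyMat pd = pd := by
    apply pv_copy_eq pd hpdG.1
    intro i
    rw [hpd, pv_pd_getD]
    split_ifs
    · exact pv_pathrow_nodup _ _ _ _
    · simp [PySem.Dict.keys_empty]
  -- T facts
  have hTf := pv_Tfold grid N M d (pvIdentB cs) (pvMVal (pvIdentB cs))
    (pv_ident_goodM N M) (pv_rrange_ident N M) (fun _ => rfl)
  have hTG : pvGoodM cs T := hTf.1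
  have hTR : pvRRange T := hTf.2.1
  have hTkeys : T.keys = cs := by
    rw [hT, pv_Tfold_keys grid N M d (pvIdentB cs)
      (by rw [pvIdentB, pv_fresh_keys _ _ hcsnd]; exact hcsnd)]
    rw [pvIdentB, pv_fresh_keys _ _ hcsnd]
  -- rows of pd and of T agree everywhere
  have hrowIter : ∀ u ∈ cs, ∀ j, pvVal (pvRowFn grid d u) j
      = pvIter cs grid N M d (pvE u) j := by
    intro u hu j
    obtain ⟨r, hr, c, hc, rfl⟩ := (pv_mem_cells N M u).mp hu
    obtain ⟨_hshape, hlv⟩ := pv_build_final grid d N M r c hr hc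
    rw [hRF r c, pv_pathrow_val]
    by_cases hj : j ∈ cs
    · have hlvj := hlv j hj
      by_cases hz : pvGet3 (pvBuildVisited grid d N M r c) j.1.toNat j.2.toNat d.length = 0
      · rw [if_neg (fun hh => hh.2 hz)]
        have hzero : pvLv (pvBuildVisited grid d N M r c) d.length j = 0 := by
          unfold pvLv
          rw [hz]
          simp
        rw [← hlvj, hzero]
      · rw [if_pos ⟨hj, hz⟩, ← hlvj]
        rfl
    · rw [if_neg (fun hh => hj hh.1)]
      rw [pv_iter_outside grid N M d (pvE ((r : Int), (c : Int)))
        (fun j' hj' => by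
          unfold pvE
          rw [if_neg]
          intro hq
          exact hj' (hq ▸ hu)) j hj]
  have hrowT : ∀ u ∈ cs, pvMVal T u = pvIter cs grid N M d (pvE u) := by
    intro u hu
    rw [hTf.2.2 u, pv_ident_val cs hcsnd u hu]
  have hbridge : ∀ u ∈ cs, ∀ j, pvVal (T.getD u PySem.Dict.empty) j
      = pvVal (pvRowFn grid d u) j := by
    intro u hu j
    show pvMVal T u j = _
    rw [hrowT u hu]
    exact (hrowIter u hu j).symm
  have hrow : ∀ u ∈ cs, ∀ j, pvMVal pd u j = pvMVal T u j := by
    intro u hu j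
    show pvVal (pd.getD u PySem.Dict.empty) j = pvVal (T.getD u PySem.Dict.empty) j
    rw [hpd, pv_pd_getD, if_pos hu, hbridge u hu j]
  have hstepEq : pvStepF cs (pvMVal pd) = pvStepF cs (pvMVal T) := by
    funext f
    unfold pvStepF pvVMul
    funext j
    apply congrArg
    apply List.map_congr_left
    intro i hi
    rw [hrow i hi]
  -- the two starts dicts
  have hstartsA_eq : pvStarts pd = cs.foldl
      (fun a u => if ¬ (pvRowFn grid d u).items = [] then a.insert u 1 else a)
      PySem.Dict.empty := by
    unfold pvStarts
    rw [hpd, pv_pd_items, List.foldl_map]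
    apply pv_foldl_fun_congr
    intro a u
    by_cases h : (pvRowFn grid d u).items = [] <;> simp [h]
  have hstartsB_eq : pvStartsB T = cs.foldl
      (fun a u => if ((T.getD u PySem.Dict.empty).values.any (fun x => decide (x ≠ 0)) = true)
        then a.insert u 1 else a) PySem.Dict.empty := by
    unfold pvStartsB
    have hitems : T.items = cs.map (fun u => (u, T.getD u PySem.Dict.empty)) := by
      have h := PySem.Dict.items_eq_map_keys T hTG.1 PySem.Dict.empty
      rw [hTkeys] at h
      exact h
    rw [hitems, List.foldl_map]
  have hcond : ∀ u ∈ cs, ((pvRowFn grid d u).items ≠ []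
      ↔ ((T.getD u PySem.Dict.empty).values.any (fun x => decide (x ≠ 0)) = true)) := by
    intro u hu
    obtain ⟨r, hr, c, hc, rfl⟩ := (pv_mem_cells N M u).mp hu
    have hshape := (pv_build_final grid d N M r c hr hc).1
    have hvalsA : ∀ p ∈ (pvRowFn grid d ((r : Int), (c : Int))).items,
        p.2 ≠ 0 ∧ 0 ≤ p.2 ∧ p.2 < pvP := by
      rw [hRF r c]
      exact pv_pathrow_vals _ N M _ hshape
    have hndA : (pvRowFn grid d ((r : Int), (c : Int))).keys.Nodup := by
      rw [hRF r c]
      exact pv_pathrow_nodup _ _ _ _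
    have hA := pv_itemsne_iff (pvRowFn grid d ((r : Int), (c : Int))) hndA hvalsA
    have hB := pv_any_iff (T.getD ((r : Int), (c : Int)) PySem.Dict.empty)
      (hTG.2.2 _).1 (fun p hp => hTR _ p hp)
    rw [hA, hB]
    constructor
    · rintro ⟨j, hj⟩
      exact ⟨j, by rw [hbridge _ hu j]; exact hj⟩
    · rintro ⟨j, hj⟩
      exact ⟨j, by rw [← hbridge _ hu j]; exact hj⟩
  have hvalStarts : pvVal (pvStarts pd) = pvVal (pvStartsB T) := by
    funext v
    rw [hstartsA_eq, hstartsB_eq]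
    rw [pv_cif_val (fun u => ¬ (pvRowFn grid d u).items = []) (fun _ => 1) cs
      PySem.Dict.empty v]
    rw [pv_cif_val (fun u => ((T.getD u PySem.Dict.empty).values.any
      (fun x => decide (x ≠ 0)) = true)) (fun _ => 1) cs PySem.Dict.empty v]
    by_cases hv : v ∈ cs
    · by_cases hc2 : (pvRowFn grid d v).items = []
      · rw [if_neg (fun hh => hh.2 hc2), if_neg (fun hh => ((hcond v hv).mpr hh.2) hc2)]
      · rw [if_pos ⟨hv, hc2⟩, if_pos ⟨hv, (hcond v hv).mp hc2⟩]
    · rw [if_neg (fun hh => hv hh.1), if_neg (fun hh => hv hh.1)]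
  have hgoodSA : pvGood cs (pvStarts pd) := by
    rw [hstartsA_eq]
    exact pv_cif_good cs _ _ cs (fun w hw _ => hw) _ (pv_good_empty cs)
  have hgoodSB : pvGood cs (pvStartsB T) := by
    rw [hstartsB_eq]
    exact pv_cif_good cs _ _ cs (fun w hw _ => hw) _ (pv_good_empty cs)
  have honesSB : ∀ p ∈ (pvStartsB T).items, p.2 = 1 := by
    intro p hp
    rw [hstartsB_eq] at hp
    rcases pv_cif_items _ _ cs PySem.Dict.empty p hp with hmem | ⟨_, _, hv⟩
    · simp [pv_items_emptyV] at hmem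
    · exact hv
  -- A's final accumulator
  rw [hcopy]
  have hA := pv_greedy_val cs hcsnd pd hpdG k ((k - 0).toNat) 0 30 (pvStarts pd) rfl
    (by norm_num) hgoodSA
  have hAg := pv_greedy_good cs pd hpdG k ((k - 0).toNat) 0 30 (pvStarts pd) rfl
    (by norm_num) hgoodSA
  obtain ⟨rA1, rA2, rA3⟩ := pv_folda_sum
    (pvGreedy (pvDpList 30 pd) k 0 30 (pvStarts pd)).items 0 (le_refl 0) (by norm_num [pvP])
  by_cases hk : k = 0
  · subst hk
    rw [if_pos rfl]
    have rB1 : 0 ≤ PySem.Int.mod ((pvStartsB T).size : Int) pvP :=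
      PySem.Int.mod_nonneg _ (by norm_num [pvP])
    have rB2 : PySem.Int.mod ((pvStartsB T).size : Int) pvP < pvP :=
      PySem.Int.mod_lt _ (by norm_num [pvP])
    apply pv_int_eq_of_cast _ _ rA1 rA2 rB1 rB2
    rw [rA3, pv_cast_mod]
    have hsize : (((pvStartsB T).size : Int) : PvZ)
        = ((pvStartsB T).items.map (fun p => (p.2 : PvZ))).sum := by
      have hones : (pvStartsB T).items.map (fun p => (p.2 : PvZ))
          = (pvStartsB T).items.map (fun _ => (1 : PvZ)) :=
        List.map_congr_left (fun p hp => by rw [honesSB p hp]; norm_num)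
      rw [hones, pv_sum_ones]
      simp [PySem.Dict.size]
    rw [hsize]
    rw [pv_tot_eq cs hcsnd _ hAg, pv_tot_eq cs hcsnd _ hgoodSB]
    rw [hA]
    rw [show ((0 : Int) - 0).toNat = 0 from rfl]
    simp only [Function.iterate_zero, id_eq]
    rw [hvalStarts]
    simp
  · rw [if_neg hk]
    have hk1 : 1 ≤ k := by omega
    set P := pvMatPowB T k with hP
    have hPG : pvGoodM cs P := pv_matpow_good cs T hTG k.toNat k rfl
    have hProws : ∀ i, ((P.getD i PySem.Dict.empty).items.map Prod.fst).Nodup := by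
      intro i
      have := (hPG.2.2 i).1
      simpa [PySem.Dict.keys] using this
    have hBgood : pvGood cs (pvVecMatB (pvStartsB T) P) :=
      pv_good_vecmatB cs _ _ hPG.2.2
    have rB1 : 0 ≤ PySem.Int.mod (pvVecMatB (pvStartsB T) P).values.sum pvP :=
      PySem.Int.mod_nonneg _ (by norm_num [pvP])
    have rB2 : PySem.Int.mod (pvVecMatB (pvStartsB T) P).values.sum pvP < pvP :=
      PySem.Int.mod_lt _ (by norm_num [pvP])
    apply pv_int_eq_of_cast _ _ rA1 rA2 rB1 rB2
    rw [rA3, pv_cast_mod]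
    have hBsum : (((pvVecMatB (pvStartsB T) P).values.sum : Int) : PvZ)
        = ((pvVecMatB (pvStartsB T) P).items.map (fun p => (p.2 : PvZ))).sum := by
      rw [Int.cast_list_sum]
      simp only [PySem.Dict.values, List.map_map]
      rfl
    rw [hBsum]
    rw [pv_tot_eq cs hcsnd _ hAg, pv_tot_eq cs hcsnd _ hBgood]
    rw [hA]
    have hBval : pvVal (pvVecMatB (pvStartsB T) P)
        = (pvStepF cs (pvMVal T))^[k.toNat] (pvVal (pvStartsB T)) := by
      rw [pv_vecmatB_val cs hcsnd _ _ hgoodSB hProws]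
      have hPs := pv_matpow_step cs hcsnd T hTG k.toNat k rfl hk1
      calc pvVMul cs (pvVal (pvStartsB T)) (pvMVal P)
          = pvStepF cs (pvMVal P) (pvVal (pvStartsB T)) := rfl
        _ = (pvStepF cs (pvMVal T))^[k.toNat] (pvVal (pvStartsB T)) := by rw [hPs]
    rw [hBval, hstepEq, hvalStarts]
    rw [show (k - 0).toNat = k.toNat by omega]
    simp
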